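-- pv_equiv track=rewrite | github.com/runarmod/knowit-julekalender | 2024/22/main.py | get_optimal_group
-- ===== SOURCE A (Python) =====
-- from collections import deque
--
-- def get_optimal_group(board: list[list[str]]):
--     W, H = len(board[0]), len(board)
--     for by, row in enumerate(board):
--         for bx, group_type in enumerate(row):
--             if group_type == " ":
--                 continue
--
--             group = get_group(board, bx, by)
--
--             if not all(
--                 y == 0 or board[y - 1][x] in (board[y][x], " ") for x, y in group
--             ):
--                 continue  # Annen type funnet over gruppen
--
--             left_edge = min(x for x, y in group)
--             right_edge = max(x for x, y in group)
--             optimal = True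
--
--             for y in range(H):
--                 for x in range(max(0, left_edge - 1), min(W, right_edge + 2)):
--                     if (x, y) in group:
--                         continue
--                     if board[y][x] == group_type:
--                         optimal = False
--                         break
--                 if not optimal:
--                     break
--             if optimal:
--                 return group
--     return None
--
-- def get_group(board: list[list[str]], x: int, y: int):
--     group_type = board[y][x]
--     q = deque([(x, y)])
--     removable = set()
--
--     while q:
--         x, y = q.popleft()
--         removable.add((x, y))
--
--         for dx, dy in ((1, 0), (-1, 0), (0, 1), (0, -1)):
--             new_x, new_y = x + dx, y + dy
--
--             if (
--                 new_x in range(len(board[0]))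
--                 and new_y in range(len(board))
--                 and board[new_y][new_x] == group_type
--                 and (new_x, new_y) not in removable
--             ):
--                 q.append((new_x, new_y))
--     return removable
-- ===== SOURCE B (Python) =====
-- def get_optimal_group(board: list[list[str]]):
--     H, W = len(board), len(board[0])
--
--     # One labelling pass: every non-space cell gets a class label; a matching
--     # left/up neighbour merges the two classes by relabelling one of them.
--     label = {}
--     for y in range(H):
--         for x in range(W):
--             t = board[y][x]
--             if t == " ":
--                 continue
--             label[(x, y)] = (x, y)
--             for n in ((x - 1, y), (x, y - 1)):
--                 if n in label and board[n[1]][n[0]] == t: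
--                     la, lb = label[(x, y)], label[n]
--                     label = {c: (la if l == lb else l) for c, l in label.items()}
--
--     # Bucket cells by final label, in scan order: one bucket per component.
--     comps = {}
--     for y in range(H):
--         for x in range(W):
--             if (x, y) in label:
--                 comps.setdefault(label[(x, y)], []).append((x, y))
--
--     # Check each component once, in order of its first cell.
--     for cells in comps.values():
--         if _optimal(board, cells, W, H):
--             return set(cells)
--     return None
--
--
-- def _optimal(board, cells, W, H):
--     x0, y0 = cells[0]
--     t = board[y0][x0]
--     for x, y in cells:
--         if y > 0 and board[y - 1][x] != t and board[y - 1][x] != " ":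
--             return False
--     xs = [x for x, _ in cells]
--     lo, hi = max(0, min(xs) - 1), min(W, max(xs) + 2)
--     cellset = set(cells)
--     for y in range(H):
--         for x in range(lo, hi):
--             if (x, y) not in cellset and board[y][x] == t:
--                 return False
--     return True
-- ===== Notes on version B (the rewrite author's own statement) =====
-- stated objective: faster
-- what changed: B never flood-fills: one scan pass labels all connected components (merging matching left/up neighbour classes by relabelling), cells are bucketed by final label, and each component's above/band check runs exactly once, instead of A's BFS flood fill plus full band re-check at every single cell.
-- outside the precondition, e.g. on get_optimal_group([[' '], []]): A returns None, B raises IndexError; on get_optimal_group([[], [' '], ['a']]): A returns {(0, 2)}, B returns None; on get_optimal_group([['a'], ['b', 'c']]): A returns {(0, 0)}, B returns {(0, 0)}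
import Mathlib
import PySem

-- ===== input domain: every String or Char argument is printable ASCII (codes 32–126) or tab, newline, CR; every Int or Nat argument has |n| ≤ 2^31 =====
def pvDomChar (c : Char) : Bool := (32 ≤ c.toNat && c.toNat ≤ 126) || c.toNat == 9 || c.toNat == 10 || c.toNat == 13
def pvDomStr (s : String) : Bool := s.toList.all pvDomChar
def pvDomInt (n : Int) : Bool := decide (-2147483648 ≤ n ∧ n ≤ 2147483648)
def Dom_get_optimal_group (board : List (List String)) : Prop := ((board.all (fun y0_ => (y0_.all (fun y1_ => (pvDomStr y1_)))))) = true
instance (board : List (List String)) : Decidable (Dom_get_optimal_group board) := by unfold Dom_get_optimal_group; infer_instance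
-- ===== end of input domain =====

-- B replaces A's per-cell BFS flood fills by a single component-labelling scan (matching left/up
-- neighbour classes merged by relabelling) followed by one check per component ('alternative').
-- Both Pythons return the answer as a set, whose iteration order is not modelled (PYSEM): both
-- ports represent a returned set by a list of its distinct elements (A's port canonically in
-- row-major order, B's port in its own build order, which is row-major as well).

-- ===== PORT A =====
-- board[y][x]; exact wherever the Python indexes in range (every use admitted by Pre_ is)
def pvCell (board : List (List String)) (y x : Int) : String :=
  PySem.List.pyGetD (PySem.List.pyGetD board y []) x ""

-- len(board[0]); Python raises on [] (excluded by Pre_), here 0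
def pvW (board : List (List String)) : Nat := (PySem.List.pyGetD board 0 []).length

-- new_x in range(len(board[0])) and new_y in range(len(board))
def pvInGrid (board : List (List String)) (p : Int × Int) : Bool :=
  decide (0 ≤ p.1) && decide (p.1 < (pvW board : Int)) &&
  decide (0 ≤ p.2) && decide (p.2 < (board.length : Int))

-- the neighbours pushed while popping (x, y) in get_group's while-loop
def pvPushes (board : List (List String)) (t : String) (removable : PySem.Set (Int × Int))
    (x y : Int) : List (Int × Int) :=
  ([((1:Int), (0:Int)), (-1, 0), (0, 1), (0, -1)]).filterMap (fun d =>
    let nx := x + d.1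
    let ny := y + d.2
    if pvInGrid board (nx, ny) && (pvCell board ny nx == t) &&
        !(PySem.Set.contains removable (nx, ny)) then some (nx, ny) else none)

-- all cells of the board in row-major (scan) order
def pvGridList (board : List (List String)) : List (Int × Int) :=
  (PySem.List.pyRange 0 (board.length : Int) 1).flatMap (fun y =>
    (PySem.List.pyRange 0 (pvW board : Int) 1).map (fun x => (x, y)))

-- lemmas cited by the termination proof of pvBfs (must precede it)
theorem pv_length_filter_le {α : Type} (l : List α) (p q : α → Bool)
    (h : ∀ a, q a = true → p a = true) :
    (l.filter q).length ≤ (l.filter p).length := by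
  induction l with
  | nil => simp
  | cons x xs ih =>
    by_cases hq : q x = true
    · simp [hq, h x hq]; omega
    · simp only [List.filter_cons]
      rw [Bool.not_eq_true] at hq
      rw [hq]
      simp only [Bool.false_eq_true, if_false]
      by_cases hp : p x = true
      · simp [hp]; omega
      · rw [Bool.not_eq_true] at hp; rw [hp]; simpa using ih

theorem pv_length_filter_lt {α : Type} (l : List α) (p q : α → Bool)
    (h : ∀ a, q a = true → p a = true) (a : α) (ha : a ∈ l)
    (hpa : p a = true) (hqa : q a = false) :
    (l.filter q).length < (l.filter p).length := by
  induction l with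
  | nil => cases ha
  | cons x xs ih =>
    rcases List.mem_cons.mp ha with rfl | ha'
    · simp only [List.filter_cons, hpa, hqa, if_true, Bool.false_eq_true, if_false]
      have := pv_length_filter_le xs p q h
      simp only [List.length_cons]
      omega
    · by_cases hq : q x = true
      · simp only [List.filter_cons, hq, h x hq, if_true, List.length_cons]
        have := ih ha'
        omega
      · rw [Bool.not_eq_true] at hq
        simp only [List.filter_cons, hq, Bool.false_eq_true, if_false]
        by_cases hp : p x = true
        · simp only [hp, if_true, List.length_cons]
          have := ih ha'
          omega
        · rw [Bool.not_eq_true] at hp; rw [hp]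
          simpa using ih ha'

theorem pv_mem_pushes_iff {board : List (List String)} {t : String}
    {r : PySem.Set (Int × Int)} {x y : Int} {p : Int × Int} :
    p ∈ pvPushes board t r x y ↔
      ((p = (x + 1, y) ∨ p = (x - 1, y) ∨ p = (x, y + 1) ∨ p = (x, y - 1)) ∧
        pvInGrid board p = true ∧ pvCell board p.2 p.1 = t ∧ p ∉ r) := by
  constructor
  · intro h
    simp only [pvPushes, List.mem_filterMap] at h
    obtain ⟨d, hdmem, hd⟩ := h
    simp at hd
    obtain ⟨⟨⟨hg, hcl⟩, hr⟩, hp⟩ := hd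
    subst hp
    refine ⟨?_, hg, by simpa using hcl, hr⟩
    fin_cases hdmem <;> simp <;> omega
  · rintro ⟨hadj, hg, hcl, hr⟩
    simp only [pvPushes, List.mem_filterMap]
    rcases hadj with h | h | h | h
    · exact ⟨(1, 0), by simp, by subst h; simp_all⟩
    · exact ⟨(-1, 0), by simp, by subst h; rw [show x + -1 = x - 1 by ring]; simp_all⟩
    · exact ⟨(0, 1), by simp, by subst h; simp_all⟩
    · exact ⟨(0, -1), by simp, by subst h; rw [show y + -1 = y - 1 by ring]; simp_all⟩

theorem pv_mem_gridList {board : List (List String)} {p : Int × Int} :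
    p ∈ pvGridList board ↔ pvInGrid board p = true := by
  cases p with
  | mk a b =>
    simp only [pvGridList, List.mem_flatMap, List.mem_map, PySem.List.mem_pyRange_one,
      pvInGrid, Bool.and_eq_true, decide_eq_true_eq]
    constructor
    · rintro ⟨yy, hy, xx, hx, heq⟩
      simp only [Prod.mk.injEq] at heq
      obtain ⟨rfl, rfl⟩ := heq
      exact ⟨⟨⟨hx.1, hx.2⟩, hy.1⟩, hy.2⟩
    · rintro ⟨⟨⟨h1, h2⟩, h3⟩, h4⟩
      exact ⟨b, ⟨h3, h4⟩, a, ⟨h1, h2⟩, rfl⟩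

theorem pv_pushes_filter_grid (board : List (List String)) (t : String)
    (r : PySem.Set (Int × Int)) (x y : Int) :
    List.filter (fun p => !pvInGrid board p) (pvPushes board t r x y) = [] := by
  rw [List.filter_eq_nil_iff]
  intro p hp
  simp [(pv_mem_pushes_iff.mp hp).2.1]

theorem pv_pushes_filter_contains (board : List (List String)) (t : String)
    (r : PySem.Set (Int × Int)) (x y : Int) :
    List.filter (fun p => pvInGrid board p && PySem.Set.contains r p) (pvPushes board t r x y) = [] := by
  rw [List.filter_eq_nil_iff]
  intro p hp
  have := (pv_mem_pushes_iff.mp hp).2.2.2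
  simp only [Bool.and_eq_true, not_and, Bool.not_eq_true]
  intro _
  rw [← Bool.not_eq_true, PySem.Set.contains_iff]
  exact this

def pvBfs (board : List (List String)) (t : String)
    (q : List (Int × Int)) (removable : PySem.Set (Int × Int)) : PySem.Set (Int × Int) :=
  match q with
  | [] => removable
  | (x, y) :: rest =>
    let removable' := PySem.Set.add removable (x, y)
    pvBfs board t (rest ++ pvPushes board t removable' x y) removable'
termination_by
  (((pvGridList board).filter (fun p => !(PySem.Set.contains removable p))).length,
   (q.filter (fun p => !(pvInGrid board p))).length,
   (q.filter (fun p => pvInGrid board p && PySem.Set.contains removable p)).length)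
decreasing_by
  have ciff : ∀ (s : PySem.Set (Int × Int)) (p : Int × Int), s.contains p = true ↔ p ∈ s :=
    fun s p => PySem.Set.contains_iff s p
  have cfalse : ∀ (s : PySem.Set (Int × Int)) (p : Int × Int), p ∉ s → s.contains p = false := by
    intro s p hp
    cases hb : s.contains p with
    | false => rfl
    | true => exact absurd ((ciff s p).mp hb) hp
  have hg2 := pv_pushes_filter_grid board t (removable.add (x, y)) x y
  have hc2 := pv_pushes_filter_contains board t (removable.add (x, y)) x y
  simp only [List.filter_append, hg2, hc2, List.append_nil, List.filter_cons]
  by_cases hmem : (x, y) ∈ removable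
  · have hcontains : removable.contains (x, y) = true := (ciff _ _).mpr hmem
    simp only [PySem.Set.add_of_mem hmem] at *
    by_cases hg : pvInGrid board (x, y) = true
    · simp only [hg, hcontains, Bool.not_true, Bool.and_self, if_true, Bool.false_eq_true,
        if_false, List.length_cons]
      exact Prod.Lex.right _ (Prod.Lex.right _ (Nat.lt_succ_self _))
    · rw [Bool.not_eq_true] at hg
      simp only [hg, Bool.not_false, if_true, Bool.false_and, Bool.false_eq_true, if_false,
        List.length_cons]
      exact Prod.Lex.right _ (Prod.Lex.left _ _ (Nat.lt_succ_self _))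
  · simp only [PySem.Set.add_of_not_mem hmem] at *
    by_cases hg : pvInGrid board (x, y) = true
    · apply Prod.Lex.left
      apply pv_length_filter_lt (pvGridList board)
        (fun p => !removable.contains p) (fun p => !(removable ++ [(x, y)]).contains p)
      · intro a ha
        simp only [Bool.not_eq_true'] at ha ⊢
        have hnotapp : a ∉ removable ++ [(x, y)] := by
          intro hm
          rw [(ciff _ _).mpr hm] at ha
          exact Bool.noConfusion ha
        exact cfalse _ _ (fun hm => hnotapp (List.mem_append_left _ hm))
      · exact pv_mem_gridList.mpr hg
      · simp only [Bool.not_eq_true']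
        exact cfalse _ _ hmem
      · simp
    · have hm1 : List.filter (fun p => !(removable ++ [(x, y)]).contains p) (pvGridList board)
          = List.filter (fun p => !removable.contains p) (pvGridList board) := by
        apply List.filter_congr
        intro a ha
        have hga := pv_mem_gridList.mp ha
        have hne : a ≠ (x, y) := by
          intro h; rw [h] at hga; exact hg hga
        congr 1
        by_cases hms : a ∈ removable
        · rw [(ciff _ _).mpr hms, (ciff _ _).mpr (List.mem_append_left _ hms)]
        · have h1 : a ∉ removable ++ [(x, y)] := by
            simp only [List.mem_append, List.mem_singleton]
            rintro (h | h)
            · exact hms h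
            · exact hne h
          rw [cfalse _ _ h1, cfalse _ _ hms]
      rw [hm1]
      rw [Bool.not_eq_true] at hg
      simp only [hg, Bool.not_false, if_true, Bool.false_and, Bool.false_eq_true, if_false,
        List.length_cons]
      exact Prod.Lex.right _ (Prod.Lex.left _ _ (Nat.lt_succ_self _))

-- get_group(board, x, y)
def pvGetGroup (board : List (List String)) (x y : Int) : PySem.Set (Int × Int) :=
  pvBfs board (pvCell board y x) [(x, y)] PySem.Set.empty

-- the returned Python set, represented canonically in row-major order (set order is unmodelled)
def pvCanon (board : List (List String)) (g : List (Int × Int)) : List (Int × Int) :=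
  (pvGridList board).filter (fun p => g.contains p)

-- all(y == 0 or board[y-1][x] in (board[y][x], " ") for x, y in group)
def pvAboveOkA (board : List (List String)) (g : List (Int × Int)) : Bool :=
  g.all (fun p => (p.2 == (0 : Int)) ||
    ((pvCell board (p.2 - 1) p.1 == pvCell board p.2 p.1) || (pvCell board (p.2 - 1) p.1 == " ")))

-- the double loop setting `optimal` (break ≡ all)
def pvBandOkA (board : List (List String)) (gt : String) (g : List (Int × Int))
    (W H left right : Int) : Bool :=
  (PySem.List.pyRange 0 H 1).all (fun y =>
    (PySem.List.pyRange (max 0 (left - 1)) (min W (right + 2)) 1).all (fun x =>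
      g.contains (x, y) || !(pvCell board y x == gt)))

-- the inner `for bx, group_type in enumerate(row)` loop
def pvColsA (board : List (List String)) (W H y : Int) :
    List (Int × String) → Option (List (Int × Int))
  | [] => none
  | (bx, gt) :: rest =>
    if gt == " " then pvColsA board W H y rest
    else
      let group := pvGetGroup board bx y
      if !(pvAboveOkA board group) then pvColsA board W H y rest
      else
        let left := (PySem.List.min? (group.map Prod.fst) (fun v => v)).getD 0
        let right := (PySem.List.max? (group.map Prod.fst) (fun v => v)).getD 0
        if pvBandOkA board gt group W H left right then some (pvCanon board group)
        else pvColsA board W H y rest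

-- the outer `for by, row in enumerate(board)` loop
def pvRowsA (board : List (List String)) (W H : Int) :
    List (Int × List String) → Option (List (Int × Int))
  | [] => none
  | (by_, row) :: rest =>
    match pvColsA board W H by_ (PySem.List.enumerate row 0) with
    | some g => some g
    | none => pvRowsA board W H rest

def get_optimal_group (board : List (List String)) : Option (List (Int × Int)) :=
  let W := (pvW board : Int)
  let H := (board.length : Int)
  pvRowsA board W H (PySem.List.enumerate board 0)

-- ===== PORT B =====
-- _optimal(board, cells, W, H); cells is always nonempty where B calls it (a bucket of a dict of
-- lists each built with at least one append), so cells[0] and min/max are total there: the port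
-- uses pyGetD / min?/max? with defaults that are never reached under Pre_.
def pvOptB (board : List (List String)) (cells : List (Int × Int)) (W H : Int) : Bool :=
  let c0 := PySem.List.pyGetD cells 0 ((0 : Int), (0 : Int))
  let t := pvCell board c0.2 c0.1
  if cells.any (fun p => decide ((0 : Int) < p.2) &&
      !(pvCell board (p.2 - 1) p.1 == t) && !(pvCell board (p.2 - 1) p.1 == " ")) then false
  else
    let lo := max 0 ((PySem.List.min? (cells.map Prod.fst) (fun v => v)).getD 0 - 1)
    let hi := min W ((PySem.List.max? (cells.map Prod.fst) (fun v => v)).getD 0 + 2)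
    let cellset : PySem.Set (Int × Int) := PySem.Set.ofList cells
    (PySem.List.pyRange 0 H 1).all (fun y =>
      (PySem.List.pyRange lo hi 1).all (fun x =>
        !(!(PySem.Set.contains cellset (x, y)) && (pvCell board y x == t))))

-- default for Dict.getD: B only ever looks up present keys
def pvLabel0 : Int × Int := ((0 : Int), (0 : Int))

-- merging one neighbour: label = {c: (la if l == lb else l) for c, l in label.items()}
def pvMerge (board : List (List String)) (c : Int × Int) (t : String)
    (m : PySem.Dict (Int × Int) (Int × Int)) (n : Int × Int) :
    PySem.Dict (Int × Int) (Int × Int) :=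
  if m.contains n && (pvCell board n.2 n.1 == t) then
    let la := m.getD c pvLabel0
    let lb := m.getD n pvLabel0
    PySem.Dict.ofList (m.items.map (fun p => (p.1, if p.2 == lb then la else p.2)))
  else m

-- the body of the labelling scan at one cell
def pvProc (board : List (List String))
    (m : PySem.Dict (Int × Int) (Int × Int)) (c : Int × Int) :
    PySem.Dict (Int × Int) (Int × Int) :=
  let t := pvCell board c.2 c.1
  if t == " " then m
  else [(c.1 - 1, c.2), (c.1, c.2 - 1)].foldl (pvMerge board c t) (m.insert c c)

-- the labelling pass: for y in range(H): for x in range(W): ...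
def pvLabelMap (board : List (List String)) : PySem.Dict (Int × Int) (Int × Int) :=
  (pvGridList board).foldl (pvProc board) PySem.Dict.empty

-- the bucketing pass: comps.setdefault(label[(x, y)], []).append((x, y))
def pvComps (board : List (List String)) (lab : PySem.Dict (Int × Int) (Int × Int)) :
    PySem.Dict (Int × Int) (List (Int × Int)) :=
  (pvGridList board).foldl
    (fun d z => if lab.contains z then d.modify (lab.getD z pvLabel0) [] (· ++ [z]) else d)
    PySem.Dict.empty

-- for cells in comps.values(): if _optimal(...): return set(cells)
def pvFind (board : List (List String)) (W H : Int) :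
    List (List (Int × Int)) → Option (List (Int × Int))
  | [] => none
  | cells :: rest =>
    if pvOptB board cells W H then some (PySem.Set.ofList cells)
    else pvFind board W H rest

def get_optimal_group_alt (board : List (List String)) : Option (List (Int × Int)) :=
  let H := (board.length : Int)
  let W := (pvW board : Int)
  let lab := pvLabelMap board
  pvFind board W H (pvComps board lab).values

-- ===== PRECONDITION & SPEC =====
-- Pre_ excludes the empty board (len(board[0]) raises IndexError) and ragged boards: on those
-- A's own indexing raises on most inputs, and on the few ragged boards it does return on
-- (extra cells sticking out past column W-1) B's range(W) scan never reads the extra cells.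
def Pre_get_optimal_group (board : List (List String)) : Prop :=
  board ≠ [] ∧ ∀ row ∈ board, row.length = pvW board
instance (board : List (List String)) : Decidable (Pre_get_optimal_group board) := by
  unfold Pre_get_optimal_group; infer_instance

def pvWitness_get_optimal_group : List (List String) := [["a"]]

def Spec_get_optimal_group (board : List (List String)) (out : Option (List (Int × Int))) : Prop :=
  out = get_optimal_group_alt board
instance (board : List (List String)) (out : Option (List (Int × Int))) :
    Decidable (Spec_get_optimal_group board out) := by unfold Spec_get_optimal_group; infer_instance

-- ===== CLAIM (what is proved, stated in full; the proofs are below) =====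
def Claim_equal_get_optimal_group : Prop := ∀ (board : List (List String)),
  Dom_get_optimal_group board → Pre_get_optimal_group board →
  Spec_get_optimal_group board (get_optimal_group board)

-- ===== LEMMAS AND PROOFS =====

-- ---- BFS computes the same-type connected component ----

def pvAdj (a b : Int × Int) : Prop :=
  b = (a.1 + 1, a.2) ∨ b = (a.1 - 1, a.2) ∨ b = (a.1, a.2 + 1) ∨ b = (a.1, a.2 - 1)

inductive pvReach (board : List (List String)) (t : String) (s : Int × Int) : (Int × Int) → Prop
  | refl : pvReach board t s s
  | step {p q : Int × Int} : pvReach board t s p → pvAdj p q → pvInGrid board q = true →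
      pvCell board q.2 q.1 = t → pvReach board t s q

theorem pvAdj_symm {a b : Int × Int} (h : pvAdj a b) : pvAdj b a := by
  rcases h with h | h | h | h <;> subst h <;> unfold pvAdj <;> simp

theorem pvReach_props {board : List (List String)} {t : String} {s p : Int × Int}
    (h : pvReach board t s p) : p = s ∨ (pvInGrid board p = true ∧ pvCell board p.2 p.1 = t) := by
  induction h with
  | refl => exact Or.inl rfl
  | step _ _ hg hc _ => exact Or.inr ⟨hg, hc⟩

theorem pvBfs_mem_mono (board : List (List String)) (t : String)
    (q : List (Int × Int)) (removable : PySem.Set (Int × Int)) :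
    ∀ p, (p ∈ q ∨ p ∈ removable) → p ∈ pvBfs board t q removable := by
  induction q, removable using pvBfs.induct board t with
  | case1 rem =>
    intro p hp
    rw [pvBfs]
    rcases hp with hp | hp
    · cases hp
    · exact hp
  | case2 rem x y rest rem' ih =>
    intro p hp
    rw [pvBfs]
    apply ih
    rcases hp with hp | hp
    · rcases List.mem_cons.mp hp with rfl | hp'
      · exact Or.inr ((PySem.Set.mem_add _ _ _).mpr (Or.inr rfl))
      · exact Or.inl (List.mem_append_left _ hp')
    · exact Or.inr ((PySem.Set.mem_add _ _ _).mpr (Or.inl hp))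

theorem pvBfs_sound (board : List (List String)) (t : String) (s : Int × Int)
    (q : List (Int × Int)) (removable : PySem.Set (Int × Int))
    (h1 : ∀ p ∈ q, pvReach board t s p) (h2 : ∀ p ∈ removable, pvReach board t s p) :
    ∀ p ∈ pvBfs board t q removable, pvReach board t s p := by
  revert h1 h2
  induction q, removable using pvBfs.induct board t with
  | case1 rem =>
    intro h1 h2 p hp
    rw [pvBfs] at hp
    exact h2 p hp
  | case2 rem x y rest rem' ih =>
    intro h1 h2 p hp
    rw [pvBfs] at hp
    refine ih ?_ ?_ p hp
    · intro a ha
      rcases List.mem_append.mp ha with ha' | ha'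
      · exact h1 a (List.mem_cons_of_mem _ ha')
      · obtain ⟨hadj, hg, hc, _⟩ := pv_mem_pushes_iff.mp ha'
        refine pvReach.step (h1 (x, y) (List.mem_cons_self ..)) ?_ hg hc
        unfold pvAdj
        exact hadj
    · intro a ha
      rcases (PySem.Set.mem_add _ _ _).mp ha with ha' | rfl
      · exact h2 a ha'
      · exact h1 (x, y) (List.mem_cons_self ..)

theorem pvBfs_closed (board : List (List String)) (t : String)
    (q : List (Int × Int)) (removable : PySem.Set (Int × Int))
    (hcl : ∀ a ∈ removable, ∀ b, pvAdj a b → pvInGrid board b = true →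
      pvCell board b.2 b.1 = t → (b ∈ removable ∨ b ∈ q)) :
    ∀ a ∈ pvBfs board t q removable, ∀ b, pvAdj a b → pvInGrid board b = true →
      pvCell board b.2 b.1 = t → b ∈ pvBfs board t q removable := by
  revert hcl
  induction q, removable using pvBfs.induct board t with
  | case1 rem =>
    intro hcl a ha b hadj hg hc
    rw [pvBfs] at ha ⊢
    rcases hcl a ha b hadj hg hc with h | h
    · exact h
    · cases h
  | case2 rem x y rest rem' ih =>
    intro hcl a ha b hadj hg hc
    rw [pvBfs] at ha ⊢
    refine ih ?_ a ha b hadj hg hc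
    intro a' ha' b' hadj' hg' hc'
    rcases (PySem.Set.mem_add _ _ _).mp ha' with hmem | rfl
    · rcases hcl a' hmem b' hadj' hg' hc' with h | h
      · exact Or.inl ((PySem.Set.mem_add _ _ _).mpr (Or.inl h))
      · rcases List.mem_cons.mp h with rfl | h'
        · exact Or.inl ((PySem.Set.mem_add _ _ _).mpr (Or.inr rfl))
        · exact Or.inr (List.mem_append_left _ h')
    · by_cases hb' : b' ∈ rem'
      · exact Or.inl hb'
      · refine Or.inr (List.mem_append_right _ ?_)
        rw [pv_mem_pushes_iff]
        exact ⟨hadj', hg', hc', hb'⟩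

theorem pvGetGroup_self_mem (board : List (List String)) (x y : Int) :
    (x, y) ∈ pvGetGroup board x y :=
  pvBfs_mem_mono board _ _ _ (x, y) (Or.inl (List.mem_singleton.mpr rfl))

theorem pvGetGroup_mem_iff (board : List (List String)) (x y : Int) (p : Int × Int) :
    p ∈ pvGetGroup board x y ↔ pvReach board (pvCell board y x) (x, y) p := by
  constructor
  · intro h
    exact pvBfs_sound board _ (x, y) _ _
      (by intro p hp; rw [List.mem_singleton] at hp; subst hp; exact pvReach.refl)
      (by intro p hp; cases hp) p h
  · intro h
    induction h with
    | refl => exact pvGetGroup_self_mem board x y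
    | step hp hadj hg hc ih =>
      exact pvBfs_closed board _ _ _ (by intro a ha; cases ha) _ ih _ hadj hg hc

-- every cell of a group is in the grid with the anchor's type
theorem pvGetGroup_cells (board : List (List String)) {x y : Int}
    (hg : pvInGrid board (x, y) = true) {p : Int × Int} (hp : p ∈ pvGetGroup board x y) :
    pvInGrid board p = true ∧ pvCell board p.2 p.1 = pvCell board y x := by
  rcases pvReach_props ((pvGetGroup_mem_iff board x y p).mp hp) with rfl | h
  · exact ⟨hg, rfl⟩
  · exact h


-- ---- connectivity within a set of admitted cells ----

def pvNS (board : List (List String)) (c : Int × Int) : Prop :=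
  pvInGrid board c = true ∧ pvCell board c.2 c.1 ≠ " "

def pvEdge (board : List (List String)) (S : (Int × Int) → Prop) (a b : Int × Int) : Prop :=
  S a ∧ S b ∧ pvAdj a b ∧ pvCell board b.2 b.1 = pvCell board a.2 a.1

def pvConn (board : List (List String)) (S : (Int × Int) → Prop) : (Int × Int) → (Int × Int) → Prop :=
  Relation.ReflTransGen (pvEdge board S)

theorem pvEdge_symm {board : List (List String)} {S : (Int × Int) → Prop} {a b : Int × Int}
    (h : pvEdge board S a b) : pvEdge board S b a :=
  ⟨h.2.1, h.1, pvAdj_symm h.2.2.1, h.2.2.2.symm⟩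

theorem pvConn_refl {board : List (List String)} {S : (Int × Int) → Prop} (a : Int × Int) :
    pvConn board S a a := Relation.ReflTransGen.refl

theorem pvConn_trans {board : List (List String)} {S : (Int × Int) → Prop} {a b c : Int × Int}
    (h1 : pvConn board S a b) (h2 : pvConn board S b c) : pvConn board S a c :=
  Relation.ReflTransGen.trans h1 h2

theorem pvConn_symm {board : List (List String)} {S : (Int × Int) → Prop} {a b : Int × Int}
    (h : pvConn board S a b) : pvConn board S b a :=
  Relation.ReflTransGen.symmetric (fun _ _ he => pvEdge_symm he) h

theorem pvConn_mono {board : List (List String)} {S S' : (Int × Int) → Prop}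
    (hs : ∀ z, S z → S' z) {a b : Int × Int} (h : pvConn board S a b) : pvConn board S' a b :=
  Relation.ReflTransGen.mono (fun _ _ he => ⟨hs _ he.1, hs _ he.2.1, he.2.2⟩) h

theorem pvConn_congr {board : List (List String)} {S S' : (Int × Int) → Prop}
    (hs : ∀ z, S z ↔ S' z) {a b : Int × Int} : pvConn board S a b ↔ pvConn board S' a b :=
  ⟨pvConn_mono (fun z => (hs z).mp), pvConn_mono (fun z => (hs z).mpr)⟩

theorem pvConn_mem {board : List (List String)} {S : (Int × Int) → Prop} {a b : Int × Int}
    (h : pvConn board S a b) : a = b ∨ (S a ∧ S b) := by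
  induction h with
  | refl => exact Or.inl rfl
  | tail hab he ih =>
    rcases ih with rfl | ⟨h1, h2⟩
    · exact Or.inr ⟨he.1, he.2.1⟩
    · exact Or.inr ⟨h1, he.2.1⟩

-- connectivity among all admitted cells is exactly what A's flood fill computes
theorem pvConn_NS_iff_reach (board : List (List String)) {c p : Int × Int}
    (hc : pvNS board c) :
    pvConn board (pvNS board) c p ↔ pvReach board (pvCell board c.2 c.1) c p := by
  constructor
  · intro h
    induction h with
    | refl => exact pvReach.refl
    | @tail b' q' hab he ih =>
      have hbt : pvCell board b'.2 b'.1 = pvCell board c.2 c.1 := by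
        rcases pvReach_props ih with rfl | hpr
        · rfl
        · exact hpr.2
      exact pvReach.step ih he.2.2.1 he.2.1.1 (by rw [he.2.2.2, hbt])
  · intro h
    induction h with
    | refl => exact pvConn_refl c
    | @step p' q' hsp hadj hgq hcq ih =>
      have hp' : pvNS board p' := by
        rcases pvReach_props hsp with rfl | hpr
        · exact hc
        · exact ⟨hpr.1, by rw [hpr.2]; exact hc.2⟩
      have hq' : pvNS board q' := ⟨hgq, by rw [hcq]; exact hc.2⟩
      have hcellp : pvCell board p'.2 p'.1 = pvCell board c.2 c.1 := by
        rcases pvReach_props hsp with rfl | hpr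
        · rfl
        · exact hpr.2
      exact Relation.ReflTransGen.tail ih ⟨hp', hq', hadj, by rw [hcq, hcellp]⟩

theorem pvMem_group_iff_conn (board : List (List String)) {c : Int × Int}
    (hc : pvNS board c) (p : Int × Int) :
    p ∈ pvGetGroup board c.1 c.2 ↔ pvConn board (pvNS board) c p := by
  rw [pvGetGroup_mem_iff, pvConn_NS_iff_reach board hc]


-- ---- relabelling a dict's values (the dict comprehension in B's merge) ----

theorem pvOfList_eq_mk {κ ν : Type} [BEq κ] [LawfulBEq κ] (pairs : List (κ × ν))
    (h : (pairs.map Prod.fst).Nodup) :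
    PySem.Dict.ofList pairs = PySem.Dict.mk pairs := by
  apply PySem.Dict.ext
  have := PySem.Dict.items_foldl_insert_fresh pairs Prod.fst Prod.snd PySem.Dict.empty
    (fun a _ => by simp [PySem.Dict.contains_empty]) h
  simpa [PySem.Dict.ofList, PySem.Dict.update] using this

theorem pvRelabel_get? {κ ν : Type} [BEq κ] [LawfulBEq κ]
    (m : PySem.Dict κ ν) (hnd : m.keys.Nodup) (g : ν → ν) (k : κ) :
    (PySem.Dict.ofList (m.items.map (fun p => (p.1, g p.2)))).get? k = (m.get? k).map g := by
  rw [pvOfList_eq_mk _ (by simpa [PySem.Dict.keys] using hnd)]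
  show (Option.map Prod.snd (List.find? (fun p => p.fst == k) (m.items.map (fun p => (p.1, g p.2))))) = _
  rw [List.find?_map]
  rw [show ((fun (p : κ × ν) => p.fst == k) ∘ (fun (p : κ × ν) => (p.1, g p.2))) = (fun (p : κ × ν) => p.fst == k) from by funext p; rfl]
  show _ = Option.map g (Option.map Prod.snd (m.items.find? (fun p => p.fst == k)))
  cases m.items.find? (fun (p : κ × ν) => p.fst == k) <;> rfl

theorem pvRelabel_keys {κ ν : Type} [BEq κ] [LawfulBEq κ]
    (m : PySem.Dict κ ν) (hnd : m.keys.Nodup) (g : ν → ν) :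
    (PySem.Dict.ofList (m.items.map (fun p => (p.1, g p.2)))).keys = m.keys := by
  rw [pvOfList_eq_mk _ (by simpa [PySem.Dict.keys] using hnd)]
  simp [PySem.Dict.keys]

theorem pvRelabel_contains {κ ν : Type} [BEq κ] [LawfulBEq κ]
    (m : PySem.Dict κ ν) (hnd : m.keys.Nodup) (g : ν → ν) (k : κ) :
    (PySem.Dict.ofList (m.items.map (fun p => (p.1, g p.2)))).contains k = m.contains k := by
  rw [PySem.Dict.contains_eq_isSome_get?, PySem.Dict.contains_eq_isSome_get?,
    pvRelabel_get? m hnd g k]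
  cases m.get? k <;> rfl

theorem pvRelabel_getD {κ ν : Type} [BEq κ] [LawfulBEq κ]
    (m : PySem.Dict κ ν) (hnd : m.keys.Nodup) (g : ν → ν) (k : κ) (d0 : ν)
    (hk : m.contains k = true) :
    (PySem.Dict.ofList (m.items.map (fun p => (p.1, g p.2)))).getD k d0 = g (m.getD k d0) := by
  rw [PySem.Dict.contains_eq_isSome_get?] at hk
  rcases ho : m.get? k with _ | v
  · rw [ho] at hk; cases hk
  · rw [PySem.Dict.getD_eq_get?_getD, pvRelabel_get? m hnd g k, ho,
      PySem.Dict.getD_eq_get?_getD, ho]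
    rfl

-- ---- joining two classes of an equivalence-like relation ----

def pvJoin {α : Type} (R : α → α → Prop) (u v a b : α) : Prop :=
  R a b ∨ (R a u ∧ R v b) ∨ (R a v ∧ R u b)

theorem pvJoin_of_R {α : Type} {R : α → α → Prop} {u v a b : α} (h : R a b) :
    pvJoin R u v a b := Or.inl h

theorem pvJoin_uv {α : Type} {R : α → α → Prop} {u v : α}
    (hu : R u u) (hv : R v v) : pvJoin R u v u v := Or.inr (Or.inl ⟨hu, hv⟩)

theorem pvJoin_symm {α : Type} {R : α → α → Prop} {u v a b : α}
    (h : pvJoin R u v a b) (hsymm : ∀ a b : α, R a b → R b a) : pvJoin R u v b a := by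
  rcases h with h | ⟨h1, h2⟩ | ⟨h1, h2⟩
  · exact Or.inl (hsymm _ _ h)
  · exact Or.inr (Or.inr ⟨hsymm _ _ h2, hsymm _ _ h1⟩)
  · exact Or.inr (Or.inl ⟨hsymm _ _ h2, hsymm _ _ h1⟩)

theorem pvJoin_trans {α : Type} {R : α → α → Prop} {u v a b c : α}
    (h1 : pvJoin R u v a b) (h2 : pvJoin R u v b c)
    (_hsymm : ∀ a b : α, R a b → R b a)
    (htrans : ∀ a b c : α, R a b → R b c → R a c) : pvJoin R u v a c := by
  rcases h1 with h1 | ⟨h1a, h1b⟩ | ⟨h1a, h1b⟩ <;>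
    rcases h2 with h2 | ⟨h2a, h2b⟩ | ⟨h2a, h2b⟩
  · exact Or.inl (htrans _ _ _ h1 h2)
  · exact Or.inr (Or.inl ⟨htrans _ _ _ h1 h2a, h2b⟩)
  · exact Or.inr (Or.inr ⟨htrans _ _ _ h1 h2a, h2b⟩)
  · exact Or.inr (Or.inl ⟨h1a, htrans _ _ _ h1b h2⟩)
  · exact Or.inr (Or.inl ⟨h1a, h2b⟩)
  · exact Or.inl (htrans _ _ _ h1a h2b)
  · exact Or.inr (Or.inr ⟨h1a, htrans _ _ _ h1b h2⟩)
  · exact Or.inl (htrans _ _ _ h1a h2b)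
  · exact Or.inr (Or.inr ⟨h1a, h2b⟩)

-- ---- the scan order of pvGridList ----

def pvPos (board : List (List String)) (p : Int × Int) : Int := p.2 * (pvW board : Int) + p.1

theorem pv_pyRange_pairwise (n : Nat) : (PySem.List.pyRange 0 (n : Int) 1).Pairwise (· < ·) := by
  rw [PySem.List.pyRange_zero_natCast]
  exact List.pairwise_map.mpr (List.pairwise_lt_range.imp (by intro a b h; exact_mod_cast h))

theorem pvGridList_pairwise (board : List (List String)) :
    (pvGridList board).Pairwise (fun a b => pvPos board a < pvPos board b) := by
  unfold pvGridList
  rw [List.pairwise_flatMap]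
  constructor
  · intro y _
    rw [List.pairwise_map]
    refine (pv_pyRange_pairwise (pvW board)).imp ?_
    intro a b h
    simpa [pvPos] using h
  · refine (pv_pyRange_pairwise board.length).imp ?_
    intro y1 y2 hy a ha b hb
    simp only [List.mem_map] at ha hb
    obtain ⟨x1, hx1, rfl⟩ := ha
    obtain ⟨x2, hx2, rfl⟩ := hb
    rw [PySem.List.mem_pyRange_one] at hx1 hx2
    simp only [pvPos]
    have hW : (0 : Int) ≤ (pvW board : Int) := by positivity
    have h1 : y1 * (pvW board : Int) + x1 < (y1 + 1) * (pvW board : Int) := by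
      have := hx1.2
      ring_nf
      linarith
    have h2 : (y1 + 1) * (pvW board : Int) ≤ y2 * (pvW board : Int) :=
      mul_le_mul_of_nonneg_right (by omega) hW
    have h3 : y2 * (pvW board : Int) ≤ y2 * (pvW board : Int) + x2 := by linarith [hx2.1]
    linarith

theorem pvGridList_nodup (board : List (List String)) : (pvGridList board).Nodup :=
  (pvGridList_pairwise board).imp (fun h => by intro heq; rw [heq] at h; exact lt_irrefl _ h)

theorem pv_done_pos_lt {board : List (List String)} {done rest : List (Int × Int)}
    {c : Int × Int} (hsplit : pvGridList board = done ++ c :: rest) :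
    ∀ b ∈ done, pvPos board b < pvPos board c := by
  have := pvGridList_pairwise board
  rw [hsplit, List.pairwise_append] at this
  intro b hb
  exact this.2.2 b hb c (List.mem_cons_self ..)

theorem pv_c_not_mem_done {board : List (List String)} {done rest : List (Int × Int)}
    {c : Int × Int} (hsplit : pvGridList board = done ++ c :: rest) : c ∉ done := by
  intro h
  exact lt_irrefl _ (pv_done_pos_lt hsplit c h)

theorem pv_done_sub_grid {board : List (List String)} {done rest : List (Int × Int)}
    {c : Int × Int} (hsplit : pvGridList board = done ++ c :: rest) :
    ∀ b ∈ done, pvInGrid board b = true := by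
  intro b hb
  exact pv_mem_gridList.mp (by rw [hsplit]; exact List.mem_append_left _ hb)

theorem pv_c_in_grid {board : List (List String)} {done rest : List (Int × Int)}
    {c : Int × Int} (hsplit : pvGridList board = done ++ c :: rest) :
    pvInGrid board c = true :=
  pv_mem_gridList.mp (by rw [hsplit]; exact List.mem_append_right _ (List.mem_cons_self ..))

-- a neighbour of c already scanned is its left or its up neighbour
theorem pv_adj_in_done {board : List (List String)} {done rest : List (Int × Int)}
    {c b : Int × Int} (hsplit : pvGridList board = done ++ c :: rest)
    (hb : b ∈ done) (hadj : pvAdj c b) :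
    b = (c.1 - 1, c.2) ∨ b = (c.1, c.2 - 1) := by
  have hpos := pv_done_pos_lt hsplit b hb
  have hgc := pv_c_in_grid hsplit
  have hW1 : (1 : Int) ≤ (pvW board : Int) := by
    simp only [pvInGrid, Bool.and_eq_true, decide_eq_true_eq] at hgc
    omega
  rcases hadj with h | h | h | h
  · exfalso; rw [h] at hpos; simp only [pvPos] at hpos; omega
  · exact Or.inl (by rw [h])
  · exfalso; rw [h] at hpos; simp only [pvPos] at hpos; nlinarith
  · exact Or.inr (by rw [h])


-- ---- what one neighbour merge does to the label map ----

theorem pvMerge_spec (board : List (List String)) (c : Int × Int) (t : String)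
    (m : PySem.Dict (Int × Int) (Int × Int)) (n : Int × Int)
    (K : (Int × Int) → Prop)
    (hK : ∀ z, m.contains z = true ↔ K z)
    (hnd : m.keys.Nodup)
    (hval : ∀ z, K z → K (m.getD z pvLabel0))
    (R : (Int × Int) → (Int × Int) → Prop)
    (hsymm : ∀ {a b : Int × Int}, R a b → R b a)
    (htrans : ∀ {a b d : Int × Int}, R a b → R b d → R a d)
    (hcls : ∀ a b, K a → K b → (m.getD a pvLabel0 = m.getD b pvLabel0 ↔ R a b))
    (hcK : K c) :
    (∀ z, (pvMerge board c t m n).contains z = true ↔ K z) ∧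
    (pvMerge board c t m n).keys.Nodup ∧
    (∀ z, K z → K ((pvMerge board c t m n).getD z pvLabel0)) ∧
    ((m.contains n && (pvCell board n.2 n.1 == t)) = true →
      ∀ a b, K a → K b →
        ((pvMerge board c t m n).getD a pvLabel0 = (pvMerge board c t m n).getD b pvLabel0 ↔
          pvJoin R c n a b)) ∧
    ((m.contains n && (pvCell board n.2 n.1 == t)) = false → pvMerge board c t m n = m) := by
  by_cases hcond : (m.contains n && (pvCell board n.2 n.1 == t)) = true
  · have hnK : K n := (hK n).mp (by
      rcases Bool.and_eq_true_iff.mp hcond with ⟨h1, _⟩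
      exact h1)
    have hme : pvMerge board c t m n =
        PySem.Dict.ofList (m.items.map (fun p =>
          (p.1, if p.2 == m.getD n pvLabel0 then m.getD c pvLabel0 else p.2))) := by
      simp only [pvMerge, hcond, if_true]
    have hgetD : ∀ z, K z → (pvMerge board c t m n).getD z pvLabel0 =
        (if m.getD z pvLabel0 = m.getD n pvLabel0 then m.getD c pvLabel0
         else m.getD z pvLabel0) := by
      intro z hz
      rw [hme, pvRelabel_getD m hnd
        (fun v => if v == m.getD n pvLabel0 then m.getD c pvLabel0 else v) z pvLabel0
        ((hK z).mpr hz)]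
      by_cases hze : m.getD z pvLabel0 = m.getD n pvLabel0
      · simp [hze]
      · simp [hze]
    refine ⟨?_, ?_, ?_, ?_, ?_⟩
    · intro z
      rw [hme, pvRelabel_contains m hnd
        (fun v => if v == m.getD n pvLabel0 then m.getD c pvLabel0 else v)]
      exact hK z
    · rw [hme, pvRelabel_keys m hnd
        (fun v => if v == m.getD n pvLabel0 then m.getD c pvLabel0 else v)]
      exact hnd
    · intro z hz
      rw [hgetD z hz]
      by_cases hze : m.getD z pvLabel0 = m.getD n pvLabel0
      · simp only [hze, if_true]
        exact hval c hcK
      · simp only [hze, if_false]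
        exact hval z hz
    · intro _ a b ha hb
      rw [hgetD a ha, hgetD b hb]
      have hra : m.getD a pvLabel0 = m.getD n pvLabel0 ↔ R a n := hcls a n ha hnK
      have hrb : m.getD b pvLabel0 = m.getD n pvLabel0 ↔ R b n := hcls b n hb hnK
      by_cases hA : R a n <;> by_cases hB : R b n
      · rw [if_pos (hra.mpr hA), if_pos (hrb.mpr hB)]
        exact ⟨fun _ => pvJoin_of_R (htrans hA (hsymm hB)), fun _ => rfl⟩
      · rw [if_pos (hra.mpr hA), if_neg (fun h => hB (hrb.mp h))]
        have : m.getD c pvLabel0 = m.getD b pvLabel0 ↔ R c b := hcls c b hcK hb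
        rw [this]
        constructor
        · intro h; exact Or.inr (Or.inr ⟨hA, h⟩)
        · rintro (h | ⟨h1, h2⟩ | ⟨h1, h2⟩)
          · exact absurd (htrans (hsymm h) hA) hB
          · exact absurd (hsymm h2) hB
          · exact h2
      · rw [if_neg (fun h => hA (hra.mp h)), if_pos (hrb.mpr hB)]
        have : m.getD a pvLabel0 = m.getD c pvLabel0 ↔ R a c := hcls a c ha hcK
        rw [this]
        constructor
        · intro h; exact Or.inr (Or.inl ⟨h, hsymm hB⟩)
        · rintro (h | ⟨h1, h2⟩ | ⟨h1, h2⟩)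
          · exact absurd (htrans h hB) hA
          · exact h1
          · exact absurd h1 hA
      · rw [if_neg (fun h => hA (hra.mp h)), if_neg (fun h => hB (hrb.mp h))]
        rw [hcls a b ha hb]
        constructor
        · exact pvJoin_of_R
        · rintro (h | ⟨h1, h2⟩ | ⟨h1, h2⟩)
          · exact h
          · exact absurd (hsymm h2) hB
          · exact absurd h1 hA
    · intro h; rw [hcond] at h; cases h
  · have h0 : (m.contains n && (pvCell board n.2 n.1 == t)) = false :=
      Bool.not_eq_true _ |>.mp hcond
    have hme : pvMerge board c t m n = m := by
      simp only [pvMerge, h0, Bool.false_eq_true, if_false]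
    rw [hme]
    exact ⟨hK, hnd, hval, fun h => absurd h hcond, fun _ => rfl⟩


-- ---- extending connectivity by the newly scanned cell ----

def pvSD (board : List (List String)) (done : List (Int × Int)) (z : Int × Int) : Prop :=
  z ∈ done ∧ pvNS board z

def pvR0 (board : List (List String)) (done : List (Int × Int)) :
    (Int × Int) → (Int × Int) → Prop :=
  pvConn board (pvSD board done)

-- the relation the two conditional merges at cell c realize
def pvJ (board : List (List String)) (done : List (Int × Int)) (c : Int × Int) :
    (Int × Int) → (Int × Int) → Prop :=
  let t := pvCell board c.2 c.1
  let J1 := if ((c.1 - 1, c.2) ∈ done ∧ pvCell board c.2 (c.1 - 1) = t)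
    then pvJoin (pvR0 board done) c (c.1 - 1, c.2) else pvR0 board done
  if ((c.1, c.2 - 1) ∈ done ∧ pvCell board (c.2 - 1) c.1 = t)
    then pvJoin J1 c (c.1, c.2 - 1) else J1

theorem pvR0_symm {board : List (List String)} {done : List (Int × Int)} {a b : Int × Int}
    (h : pvR0 board done a b) : pvR0 board done b a := pvConn_symm h

theorem pvR0_trans {board : List (List String)} {done : List (Int × Int)} {a b d : Int × Int}
    (h1 : pvR0 board done a b) (h2 : pvR0 board done b d) : pvR0 board done a d :=
  pvConn_trans h1 h2

theorem pvJ_of_R0 {board : List (List String)} {done : List (Int × Int)} {c a b : Int × Int}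
    (h : pvR0 board done a b) : pvJ board done c a b := by
  unfold pvJ
  split_ifs with h2 h1 h1
  · exact pvJoin_of_R (pvJoin_of_R h)
  · exact pvJoin_of_R h
  · exact pvJoin_of_R h
  · exact h

theorem pvJ_refl {board : List (List String)} {done : List (Int × Int)} {c : Int × Int}
    (a : Int × Int) : pvJ board done c a a := pvJ_of_R0 (pvConn_refl a)

theorem pvJ_symm {board : List (List String)} {done : List (Int × Int)} {c a b : Int × Int}
    (h : pvJ board done c a b) : pvJ board done c b a := by
  unfold pvJ at h ⊢
  split_ifs at h ⊢ with h2 h1 h1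
  · exact pvJoin_symm h (fun _ _ hx => pvJoin_symm hx (fun _ _ hy => pvR0_symm hy))
  · exact pvJoin_symm h (fun _ _ hy => pvR0_symm hy)
  · exact pvJoin_symm h (fun _ _ hy => pvR0_symm hy)
  · exact pvR0_symm h

theorem pvJ_trans {board : List (List String)} {done : List (Int × Int)} {c a b d : Int × Int}
    (h1 : pvJ board done c a b) (h2 : pvJ board done c b d) : pvJ board done c a d := by
  unfold pvJ at h1 h2 ⊢
  split_ifs at h1 h2 ⊢ with hc2 hc1 hc1
  · exact pvJoin_trans h1 h2
      (fun _ _ hx => pvJoin_symm hx (fun _ _ hy => pvR0_symm hy))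
      (fun _ _ _ hx hy => pvJoin_trans hx hy (fun _ _ hz => pvR0_symm hz)
        (fun _ _ _ hz hw => pvR0_trans hz hw))
  · exact pvJoin_trans h1 h2 (fun _ _ hy => pvR0_symm hy)
      (fun _ _ _ hz hw => pvR0_trans hz hw)
  · exact pvJoin_trans h1 h2 (fun _ _ hy => pvR0_symm hy)
      (fun _ _ _ hz hw => pvR0_trans hz hw)
  · exact pvR0_trans h1 h2

theorem pvJ_n1 {board : List (List String)} {done : List (Int × Int)} {c : Int × Int}
    (hQ : (c.1 - 1, c.2) ∈ done ∧ pvCell board c.2 (c.1 - 1) = pvCell board c.2 c.1) :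
    pvJ board done c c (c.1 - 1, c.2) := by
  unfold pvJ
  rw [if_pos hQ]
  have hJ1 : pvJoin (pvR0 board done) c (c.1 - 1, c.2) c (c.1 - 1, c.2) :=
    pvJoin_uv (pvConn_refl c) (pvConn_refl _)
  split_ifs
  · exact pvJoin_of_R hJ1
  · exact hJ1

theorem pvJ_n2 {board : List (List String)} {done : List (Int × Int)} {c : Int × Int}
    (hQ : (c.1, c.2 - 1) ∈ done ∧ pvCell board (c.2 - 1) c.1 = pvCell board c.2 c.1) :
    pvJ board done c c (c.1, c.2 - 1) := by
  unfold pvJ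
  rw [if_pos hQ]
  split_ifs with h1
  · exact pvJoin_uv (pvJoin_of_R (pvConn_refl c)) (pvJoin_of_R (pvConn_refl _))
  · exact pvJoin_uv (pvConn_refl c) (pvConn_refl _)

theorem pvJoin_to_conn {board : List (List String)} {S : (Int × Int) → Prop}
    {R : (Int × Int) → (Int × Int) → Prop} {u v : Int × Int}
    (hR : ∀ a b, R a b → pvConn board S a b) (huv : pvConn board S u v) :
    ∀ a b, pvJoin R u v a b → pvConn board S a b := by
  rintro a b (h | ⟨h1, h2⟩ | ⟨h1, h2⟩)
  · exact hR _ _ h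
  · exact pvConn_trans (hR _ _ h1) (pvConn_trans huv (hR _ _ h2))
  · exact pvConn_trans (hR _ _ h1) (pvConn_trans (pvConn_symm huv) (hR _ _ h2))

theorem pvConn_step (board : List (List String)) {done rest : List (Int × Int)}
    {c : Int × Int} (hsplit : pvGridList board = done ++ c :: rest) (hNSc : pvNS board c) :
    ∀ a b, pvConn board (pvSD board (done ++ [c])) a b ↔ pvJ board done c a b := by
  have hS'c : pvSD board (done ++ [c]) c :=
    ⟨List.mem_append_right _ (List.mem_singleton.mpr rfl), hNSc⟩
  have hSsub : ∀ z, pvSD board done z → pvSD board (done ++ [c]) z :=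
    fun z hz => ⟨List.mem_append_left _ hz.1, hz.2⟩
  have hS'cases : ∀ z, pvSD board (done ++ [c]) z → z = c ∨ pvSD board done z := by
    intro z hz
    rcases List.mem_append.mp hz.1 with h | h
    · exact Or.inr ⟨h, hz.2⟩
    · exact Or.inl (List.mem_singleton.mp h)
  have hQNS : ∀ n, n ∈ done → pvCell board n.2 n.1 = pvCell board c.2 c.1 →
      pvSD board done n := by
    intro n hn hcell
    exact ⟨hn, ⟨pv_done_sub_grid hsplit n hn, by rw [hcell]; exact hNSc.2⟩⟩
  have hedge_n : ∀ n, n ∈ done → pvCell board n.2 n.1 = pvCell board c.2 c.1 → pvAdj c n →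
      pvConn board (pvSD board (done ++ [c])) c n := by
    intro n hn hcell hadj
    exact Relation.ReflTransGen.single ⟨hS'c, hSsub n (hQNS n hn hcell), hadj, hcell⟩
  intro a b
  constructor
  · intro h
    induction h with
    | refl => exact pvJ_refl a
    | @tail b' y' hab he ih =>
      by_cases hyc : y' = c
      · rw [hyc] at he ⊢
        by_cases hbc : b' = c
        · rw [hbc] at ih; exact ih
        · have hbd : pvSD board done b' := by
            rcases hS'cases b' he.1 with h | h
            · exact absurd h hbc
            · exact h
          have hcellb : pvCell board b'.2 b'.1 = pvCell board c.2 c.1 := he.2.2.2.symm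
          rcases pv_adj_in_done hsplit hbd.1 (pvAdj_symm he.2.2.1) with h | h <;> subst h
          · exact pvJ_trans ih (pvJ_symm (pvJ_n1 ⟨hbd.1, hcellb⟩))
          · exact pvJ_trans ih (pvJ_symm (pvJ_n2 ⟨hbd.1, hcellb⟩))
      · by_cases hbc : b' = c
        · rw [hbc] at he ih
          have hyd : pvSD board done y' := by
            rcases hS'cases y' he.2.1 with h | h
            · exact absurd h hyc
            · exact h
          have hcelly : pvCell board y'.2 y'.1 = pvCell board c.2 c.1 := he.2.2.2
          rcases pv_adj_in_done hsplit hyd.1 he.2.2.1 with h | h <;> subst h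
          · exact pvJ_trans ih (pvJ_n1 ⟨hyd.1, hcelly⟩)
          · exact pvJ_trans ih (pvJ_n2 ⟨hyd.1, hcelly⟩)
        · have hbd : pvSD board done b' := by
            rcases hS'cases b' he.1 with h | h
            · exact absurd h hbc
            · exact h
          have hyd : pvSD board done y' := by
            rcases hS'cases y' he.2.1 with h | h
            · exact absurd h hyc
            · exact h
          exact pvJ_trans ih (pvJ_of_R0
            (Relation.ReflTransGen.single ⟨hbd, hyd, he.2.2.1, he.2.2.2⟩))
  · intro h
    have hR0sub : ∀ a b, pvR0 board done a b → pvConn board (pvSD board (done ++ [c])) a b :=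
      fun a b hr => pvConn_mono hSsub hr
    unfold pvJ at h
    split_ifs at h with h2 h1 h1
    · refine pvJoin_to_conn ?_ ?_ a b h
      · exact pvJoin_to_conn hR0sub
          (hedge_n _ h1.1 h1.2 (Or.inr (Or.inl rfl)))
      · exact hedge_n _ h2.1 h2.2 (Or.inr (Or.inr (Or.inr rfl)))
    · exact pvJoin_to_conn hR0sub
        (hedge_n _ h2.1 h2.2 (Or.inr (Or.inr (Or.inr rfl)))) a b h
    · exact pvJoin_to_conn hR0sub
        (hedge_n _ h1.1 h1.2 (Or.inr (Or.inl rfl))) a b h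
    · exact hR0sub a b h


-- ---- the labelling-scan invariant ----

def pvInvL (board : List (List String)) (done : List (Int × Int))
    (m : PySem.Dict (Int × Int) (Int × Int)) : Prop :=
  (∀ z, m.contains z = true ↔ pvSD board done z) ∧
  m.keys.Nodup ∧
  (∀ z, pvSD board done z → pvSD board done (m.getD z pvLabel0)) ∧
  (∀ a b, pvSD board done a → pvSD board done b →
    (m.getD a pvLabel0 = m.getD b pvLabel0 ↔ pvR0 board done a b))

theorem pvProc_step (board : List (List String)) {done rest : List (Int × Int)}
    {c : Int × Int} {m : PySem.Dict (Int × Int) (Int × Int)}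
    (hsplit : pvGridList board = done ++ c :: rest)
    (hinv : pvInvL board done m) : pvInvL board (done ++ [c]) (pvProc board m c) := by
  obtain ⟨hK, hnd, hval, hcls⟩ := hinv
  by_cases hsp : pvCell board c.2 c.1 = " "
  · have hproc : pvProc board m c = m := by
      simp [pvProc, hsp]
    have hSD' : ∀ z, pvSD board (done ++ [c]) z ↔ pvSD board done z := by
      intro z
      constructor
      · intro hz
        rcases List.mem_append.mp hz.1 with h | h
        · exact ⟨h, hz.2⟩
        · exact absurd hz.2.2 (by rw [List.mem_singleton.mp h]; simpa using hsp)
      · intro hz; exact ⟨List.mem_append_left _ hz.1, hz.2⟩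
    rw [hproc]
    refine ⟨fun z => (hK z).trans (hSD' z).symm, hnd, ?_, ?_⟩
    · intro z hz
      exact (hSD' _).mpr (hval z ((hSD' z).mp hz))
    · intro a b ha hb
      rw [hcls a b ((hSD' a).mp ha) ((hSD' b).mp hb)]
      exact pvConn_congr (fun z => (hSD' z).symm)
  · have hNSc : pvNS board c := ⟨pv_c_in_grid hsplit, hsp⟩
    have hcnotdone : c ∉ done := pv_c_not_mem_done hsplit
    have hS'iff : ∀ z, pvSD board (done ++ [c]) z ↔ (z = c ∨ pvSD board done z) := by
      intro z
      constructor
      · intro hz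
        rcases List.mem_append.mp hz.1 with h | h
        · exact Or.inr ⟨h, hz.2⟩
        · exact Or.inl (List.mem_singleton.mp h)
      · rintro (rfl | hz)
        · exact ⟨List.mem_append_right _ (List.mem_singleton.mpr rfl), hNSc⟩
        · exact ⟨List.mem_append_left _ hz.1, hz.2⟩
    have hS'c : pvSD board (done ++ [c]) c := (hS'iff c).mpr (Or.inl rfl)
    have hS'val : ∀ z, pvSD board done z → pvSD board (done ++ [c]) z :=
      fun z hz => (hS'iff z).mpr (Or.inr hz)
    have hSDof : ∀ z, pvSD board (done ++ [c]) z → z ≠ c → pvSD board done z := by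
      intro z hz hne
      rcases (hS'iff z).mp hz with h | h
      · exact absurd h hne
      · exact h
    have hK1 : ∀ z, (m.insert c c).contains z = true ↔ pvSD board (done ++ [c]) z := by
      intro z
      rw [PySem.Dict.contains_insert, hS'iff z]
      simp only [Bool.or_eq_true, beq_iff_eq]
      rw [hK z]
    have hnd1 : (m.insert c c).keys.Nodup := PySem.Dict.nodup_keys_insert m c c hnd
    have hgetD1 : ∀ z, (m.insert c c).getD z pvLabel0 =
        if z = c then c else m.getD z pvLabel0 := by
      intro z
      exact PySem.Dict.getD_insert m c z c pvLabel0
    have hval_ne : ∀ z, pvSD board done z → m.getD z pvLabel0 ≠ c := by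
      intro z hz heq
      exact hcnotdone (heq ▸ (hval z hz).1)
    have hval1 : ∀ z, pvSD board (done ++ [c]) z →
        pvSD board (done ++ [c]) ((m.insert c c).getD z pvLabel0) := by
      intro z hz
      rw [hgetD1 z]
      by_cases hzc : z = c
      · rw [if_pos hzc]; exact hS'c
      · rw [if_neg hzc]
        exact hS'val _ (hval z (hSDof z hz hzc))
    have hcls1 : ∀ a b, pvSD board (done ++ [c]) a → pvSD board (done ++ [c]) b →
        ((m.insert c c).getD a pvLabel0 = (m.insert c c).getD b pvLabel0 ↔
          pvR0 board done a b) := by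
      intro a b ha hb
      rw [hgetD1 a, hgetD1 b]
      by_cases hac : a = c <;> by_cases hbc : b = c
      · rw [if_pos hac, if_pos hbc]
        refine iff_of_true rfl ?_
        rw [hac, hbc]
        exact pvConn_refl c
      · rw [if_pos hac, if_neg hbc]
        have hb' : pvSD board done b := hSDof b hb hbc
        refine iff_of_false (fun h => hval_ne b hb' h.symm) (fun h => ?_)
        rw [hac] at h
        rcases pvConn_mem h with h' | ⟨h1, _⟩
        · exact hbc h'.symm
        · exact hcnotdone h1.1
      · rw [if_neg hac, if_pos hbc]
        have ha' : pvSD board done a := hSDof a ha hac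
        refine iff_of_false (fun h => hval_ne a ha' h) (fun h => ?_)
        rw [hbc] at h
        rcases pvConn_mem h with h' | ⟨_, h2⟩
        · exact hac h'
        · exact hcnotdone h2.1
      · rw [if_neg hac, if_neg hbc]
        exact hcls a b (hSDof a ha hac) (hSDof b hb hbc)
    set t := pvCell board c.2 c.1 with ht
    have hproc : pvProc board m c =
        pvMerge board c t (pvMerge board c t (m.insert c c) (c.1 - 1, c.2)) (c.1, c.2 - 1) := by
      simp only [pvProc, ← ht, beq_iff_eq, if_neg hsp, List.foldl_cons, List.foldl_nil]
    have hne1 : (c.1 - 1, c.2) ≠ c := by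
      intro h
      have := congrArg Prod.fst h
      simp at this
    have hne2 : (c.1, c.2 - 1) ≠ c := by
      intro h
      have := congrArg Prod.snd h
      simp at this
    have hbridge : ∀ (m' : PySem.Dict (Int × Int) (Int × Int)) (n : Int × Int), n ≠ c →
        (∀ z, m'.contains z = true ↔ pvSD board (done ++ [c]) z) →
        ((m'.contains n && (pvCell board n.2 n.1 == t)) = true ↔
          (n ∈ done ∧ pvCell board n.2 n.1 = t)) := by
      intro m' n hne hK'
      rw [Bool.and_eq_true_iff, hK' n, beq_iff_eq]
      constructor
      · rintro ⟨h1, h2⟩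
        exact ⟨(hSDof n h1 hne).1, h2⟩
      · rintro ⟨h1, h2⟩
        refine ⟨(hS'iff n).mpr (Or.inr ⟨h1, ⟨pv_done_sub_grid hsplit n h1, ?_⟩⟩), h2⟩
        rw [h2]; exact hNSc.2
    obtain ⟨hK2, hnd2, hval2, hcls2j, hcls2n⟩ :=
      pvMerge_spec board c t (m.insert c c) (c.1 - 1, c.2) (pvSD board (done ++ [c]))
        hK1 hnd1 hval1 (pvR0 board done)
        (fun h => pvR0_symm h) (fun h1 h2 => pvR0_trans h1 h2) hcls1 hS'c
    have hQ1iff := hbridge (m.insert c c) (c.1 - 1, c.2) hne1 hK1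
    have hQ2iff := hbridge (pvMerge board c t (m.insert c c) (c.1 - 1, c.2)) (c.1, c.2 - 1)
      hne2 hK2
    have hstep := pvConn_step board hsplit hNSc
    rw [hproc]
    by_cases hQ1 : ((c.1 - 1, c.2) ∈ done ∧ pvCell board c.2 (c.1 - 1) = t)
    · have hcls2 := hcls2j (hQ1iff.mpr hQ1)
      have hJ1symm : ∀ a b, pvJoin (pvR0 board done) c (c.1 - 1, c.2) a b →
          pvJoin (pvR0 board done) c (c.1 - 1, c.2) b a :=
        fun a b h => pvJoin_symm h (fun _ _ hx => pvR0_symm hx)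
      have hJ1trans : ∀ a b d, pvJoin (pvR0 board done) c (c.1 - 1, c.2) a b →
          pvJoin (pvR0 board done) c (c.1 - 1, c.2) b d →
          pvJoin (pvR0 board done) c (c.1 - 1, c.2) a d :=
        fun a b d h1 h2 =>
          pvJoin_trans h1 h2 (fun _ _ hx => pvR0_symm hx) (fun _ _ _ hx hy => pvR0_trans hx hy)
      obtain ⟨hK3, hnd3, hval3, hcls3j, hcls3n⟩ :=
        pvMerge_spec board c t (pvMerge board c t (m.insert c c) (c.1 - 1, c.2)) (c.1, c.2 - 1)
          (pvSD board (done ++ [c])) hK2 hnd2 hval2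
          (pvJoin (pvR0 board done) c (c.1 - 1, c.2))
          (fun h => hJ1symm _ _ h) (fun h1 h2 => hJ1trans _ _ _ h1 h2) hcls2 hS'c
      refine ⟨hK3, hnd3, hval3, ?_⟩
      intro a b ha hb
      by_cases hQ2 : ((c.1, c.2 - 1) ∈ done ∧ pvCell board (c.2 - 1) c.1 = t)
      · have hJeq : pvJ board done c a b ↔
            pvJoin (pvJoin (pvR0 board done) c (c.1 - 1, c.2)) c (c.1, c.2 - 1) a b := by
          unfold pvJ
          rw [← ht, if_pos hQ2, if_pos hQ1]
        exact (hcls3j (hQ2iff.mpr hQ2) a b ha hb).trans (hJeq.symm.trans (hstep a b).symm)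
      · have hJeq : pvJ board done c a b ↔
            pvJoin (pvR0 board done) c (c.1 - 1, c.2) a b := by
          unfold pvJ
          rw [← ht, if_neg hQ2, if_pos hQ1]
        rw [hcls3n (by
          rw [← Bool.not_eq_true]
          intro h
          exact hQ2 (hQ2iff.mp h))]
        exact (hcls2 a b ha hb).trans (hJeq.symm.trans (hstep a b).symm)
    · have hm2eq : pvMerge board c t (m.insert c c) (c.1 - 1, c.2) = m.insert c c :=
        hcls2n (by
          rw [← Bool.not_eq_true]
          intro h
          exact hQ1 (hQ1iff.mp h))
      have hcls2 : ∀ a b, pvSD board (done ++ [c]) a → pvSD board (done ++ [c]) b →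
          ((pvMerge board c t (m.insert c c) (c.1 - 1, c.2)).getD a pvLabel0 =
            (pvMerge board c t (m.insert c c) (c.1 - 1, c.2)).getD b pvLabel0 ↔
            pvR0 board done a b) := by
        intro a b ha hb
        rw [hm2eq]
        exact hcls1 a b ha hb
      obtain ⟨hK3, hnd3, hval3, hcls3j, hcls3n⟩ :=
        pvMerge_spec board c t (pvMerge board c t (m.insert c c) (c.1 - 1, c.2)) (c.1, c.2 - 1)
          (pvSD board (done ++ [c])) hK2 hnd2 hval2 (pvR0 board done)
          (fun h => pvR0_symm h) (fun h1 h2 => pvR0_trans h1 h2) hcls2 hS'c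
      refine ⟨hK3, hnd3, hval3, ?_⟩
      intro a b ha hb
      by_cases hQ2 : ((c.1, c.2 - 1) ∈ done ∧ pvCell board (c.2 - 1) c.1 = t)
      · have hJeq : pvJ board done c a b ↔
            pvJoin (pvR0 board done) c (c.1, c.2 - 1) a b := by
          unfold pvJ
          rw [← ht, if_pos hQ2, if_neg hQ1]
        exact (hcls3j (hQ2iff.mpr hQ2) a b ha hb).trans (hJeq.symm.trans (hstep a b).symm)
      · have hJeq : pvJ board done c a b ↔ pvR0 board done a b := by
          unfold pvJ
          rw [← ht, if_neg hQ2, if_neg hQ1]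
        rw [hcls3n (by
          rw [← Bool.not_eq_true]
          intro h
          exact hQ2 (hQ2iff.mp h))]
        exact (hcls2 a b ha hb).trans (hJeq.symm.trans (hstep a b).symm)


-- ---- the labelling pass computes component classes ----

theorem pvLabel_fold (board : List (List String)) :
    ∀ (rest done : List (Int × Int)) (m : PySem.Dict (Int × Int) (Int × Int)),
    pvGridList board = done ++ rest → pvInvL board done m →
    pvInvL board (done ++ rest) (rest.foldl (pvProc board) m) := by
  intro rest
  induction rest with
  | nil =>
    intro done m h hinv
    simpa using hinv
  | cons c rest' ih =>
    intro done m h hinv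
    have h2 : pvGridList board = (done ++ [c]) ++ rest' := by
      rw [h, List.append_assoc]
      rfl
    have := ih (done ++ [c]) (pvProc board m c) h2 (pvProc_step board h hinv)
    rw [List.append_assoc] at this
    simpa using this

theorem pvLabelMap_inv (board : List (List String)) :
    pvInvL board (pvGridList board) (pvLabelMap board) := by
  have hbase : pvInvL board [] PySem.Dict.empty := by
    refine ⟨?_, ?_, ?_, ?_⟩
    · intro z
      simp [PySem.Dict.contains_empty, pvSD]
    · exact PySem.Dict.nodup_keys_empty
    · intro z hz; exact absurd hz.1 (List.not_mem_nil)
    · intro a b ha _; exact absurd ha.1 (List.not_mem_nil)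
  have := pvLabel_fold board (pvGridList board) [] PySem.Dict.empty (by simp) hbase
  simpa [pvLabelMap] using this

theorem pvSD_grid_iff (board : List (List String)) (z : Int × Int) :
    pvSD board (pvGridList board) z ↔ pvNS board z :=
  ⟨fun h => h.2, fun h => ⟨pv_mem_gridList.mpr h.1, h⟩⟩

theorem pvLabelMap_contains (board : List (List String)) (z : Int × Int) :
    (pvLabelMap board).contains z = true ↔ pvNS board z :=
  ((pvLabelMap_inv board).1 z).trans (pvSD_grid_iff board z)

theorem pvLabelMap_classes (board : List (List String)) {a b : Int × Int}
    (ha : pvNS board a) (hb : pvNS board b) :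
    ((pvLabelMap board).getD a pvLabel0 = (pvLabelMap board).getD b pvLabel0 ↔
      pvConn board (pvNS board) a b) := by
  rw [(pvLabelMap_inv board).2.2.2 a b ((pvSD_grid_iff board a).mpr ha)
    ((pvSD_grid_iff board b).mpr hb)]
  exact pvConn_congr (fun z => pvSD_grid_iff board z)

-- labels agree exactly on membership in A's flood-fill group
theorem pvLabel_eq_iff_mem_group (board : List (List String)) {z p : Int × Int}
    (hz : pvNS board z) (hp : pvNS board p) :
    ((pvLabelMap board).getD z pvLabel0 = (pvLabelMap board).getD p pvLabel0 ↔
      p ∈ pvGetGroup board z.1 z.2) :=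
  (pvLabelMap_classes board hz hp).trans (pvMem_group_iff_conn board hz p).symm

-- every cell of a group of an admitted anchor is admitted
theorem pvGroup_cells_NS (board : List (List String)) {z : Int × Int} (hz : pvNS board z)
    {p : Int × Int} (hp : p ∈ pvGetGroup board z.1 z.2) : pvNS board p := by
  have := pvGetGroup_cells board (x := z.1) (y := z.2) hz.1 hp
  exact ⟨this.1, by rw [this.2]; exact hz.2⟩

-- ---- phase 2: buckets, semantic components, and find-first ----

-- the canonical row-major listing of the component of z
def pvSem (board : List (List String)) (z : Int × Int) : List (Int × Int) :=
  pvCanon board (pvGetGroup board z.1 z.2)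

-- the scan with the per-component verdict, one cell at a time
def pvScanSem (board : List (List String)) (W H : Int) :
    List (Int × Int) → Option (List (Int × Int))
  | [] => none
  | z :: rest =>
    if !(pvCell board z.2 z.1 == " ") && pvOptB board (pvSem board z) W H
    then some (pvSem board z) else pvScanSem board W H rest

theorem pvFind_append (board : List (List String)) (W H : Int)
    (u v : List (List (Int × Int))) :
    pvFind board W H (u ++ v) =
      match pvFind board W H u with
      | some r => some r
      | none => pvFind board W H v := by
  induction u with
  | nil => simp [pvFind]
  | cons cells u' ih =>
    rw [List.cons_append, pvFind, pvFind]
    by_cases h : pvOptB board cells W H = true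
    · simp [h]
    · rw [Bool.not_eq_true] at h
      simp [h, ih]

theorem pvFind_none (board : List (List String)) (W H : Int)
    (u : List (List (Int × Int))) (h : ∀ cells ∈ u, pvOptB board cells W H = false) :
    pvFind board W H u = none := by
  induction u with
  | nil => rfl
  | cons cells u' ih =>
    rw [pvFind, if_neg (by rw [h cells (List.mem_cons_self ..)]; simp)]
    exact ih (fun c hc => h c (List.mem_cons_of_mem _ hc))

theorem pvSet_update_append {α : Type} [BEq α] (xs : List α) :
    ∀ (s : PySem.Set α), ∃ ext, PySem.Set.update s xs = s ++ ext := by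
  induction xs with
  | nil => intro s; exact ⟨[], by simp [PySem.Set.update]⟩
  | cons x xs' ih =>
    intro s
    have hcons : PySem.Set.update s (x :: xs') = PySem.Set.update (PySem.Set.add s x) xs' := rfl
    by_cases hm : PySem.Set.contains s x = true
    · obtain ⟨ext, hext⟩ := ih s
      refine ⟨ext, ?_⟩
      rw [hcons, PySem.Set.add]
      simp only [hm, if_true]
      exact hext
    · obtain ⟨ext, hext⟩ := ih (s ++ [x])
      refine ⟨[x] ++ ext, ?_⟩
      rw [hcons, PySem.Set.add]
      simp only [hm, Bool.false_eq_true, if_false]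
      rw [hext, List.append_assoc]

-- a guarded fold is the fold over the filtered list
theorem pv_foldl_guard {α β : Type} (p : α → Bool) (f : β → α → β) :
    ∀ (l : List α) (init : β),
    l.foldl (fun d z => if p z then f d z else d) init = (l.filter p).foldl f init := by
  intro l
  induction l with
  | nil => intro init; rfl
  | cons z l' ih =>
    intro init
    rw [List.foldl_cons, List.filter_cons]
    by_cases h : p z = true
    · simp [h, ih]
    · rw [Bool.not_eq_true] at h
      simp [h, ih]

-- the scan skips exactly the cells its guard rejects
theorem pvScanSem_filter (board : List (List String)) (W H : Int) (l : List (Int × Int)) :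
    pvScanSem board W H l =
      pvScanSem board W H (l.filter (fun z => !(pvCell board z.2 z.1 == " "))) := by
  induction l with
  | nil => rfl
  | cons z l' ih =>
    rw [pvScanSem, List.filter_cons]
    by_cases h : (pvCell board z.2 z.1 == " ") = true
    · rw [h]
      simp only [Bool.not_true, Bool.false_and, Bool.false_eq_true, if_false]
      exact ih
    · rw [Bool.not_eq_true] at h
      simp only [h, Bool.not_false, Bool.true_and, if_true]
      rw [pvScanSem]
      simp only [h, Bool.not_false, Bool.true_and]
      by_cases hv : pvOptB board (pvSem board z) W H = true
      · simp [hv]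
      · rw [Bool.not_eq_true] at hv
        simp [hv, ih]


-- ---- B's buckets are the semantic components, in first-anchor order ----

def pvKey (board : List (List String)) (z : Int × Int) : Int × Int :=
  (pvLabelMap board).getD z pvLabel0

def pvScanNS (board : List (List String)) : List (Int × Int) :=
  (pvGridList board).filter (fun z => (pvLabelMap board).contains z)

def pvBucket (board : List (List String)) (k : Int × Int) : List (Int × Int) :=
  (pvScanNS board).filter (fun z => pvKey board z == k)

theorem pv_mem_scanNS (board : List (List String)) (z : Int × Int) :
    z ∈ pvScanNS board ↔ z ∈ pvGridList board ∧ pvNS board z := by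
  rw [pvScanNS, List.mem_filter]
  constructor
  · rintro ⟨h1, h2⟩
    exact ⟨h1, (pvLabelMap_contains board z).mp h2⟩
  · rintro ⟨h1, h2⟩
    exact ⟨h1, (pvLabelMap_contains board z).mpr h2⟩

theorem pvComps_values (board : List (List String)) :
    (pvComps board (pvLabelMap board)).values =
      (PySem.Set.ofList ((pvScanNS board).map (pvKey board))).map (pvBucket board) := by
  have hguard : pvComps board (pvLabelMap board) =
      (pvScanNS board).foldl
        (fun d z => d.modify (pvKey board z) [] (· ++ [z])) PySem.Dict.empty := by
    simp only [pvComps, pvScanNS, pvKey]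
    exact pv_foldl_guard (fun z => (pvLabelMap board).contains z)
      (fun d z => d.modify ((pvLabelMap board).getD z pvLabel0) [] (· ++ [z]))
      (pvGridList board) PySem.Dict.empty
  have hkeys : (pvComps board (pvLabelMap board)).keys =
      PySem.Set.ofList ((pvScanNS board).map (pvKey board)) := by
    rw [hguard]
    rw [PySem.Dict.keys_foldl_modify_key (pvScanNS board) (pvKey board) []
      (fun _ z => (· ++ [z])) PySem.Dict.empty]
    rfl
  have hnodup : (pvComps board (pvLabelMap board)).keys.Nodup := by
    rw [hguard]
    exact PySem.Dict.nodup_keys_foldl_modify_key (pvScanNS board) (pvKey board) []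
      (fun _ z => (· ++ [z])) PySem.Dict.empty PySem.Dict.nodup_keys_empty
  have hgetD : ∀ k, (pvComps board (pvLabelMap board)).getD k [] = pvBucket board k := by
    intro k
    rw [hguard]
    have hmapped : (pvScanNS board).foldl
        (fun d z => d.modify (pvKey board z) [] (· ++ [z])) PySem.Dict.empty =
        ((pvScanNS board).map (fun z => (pvKey board z, z))).foldl
          (fun d p => d.modify p.1 [] (· ++ [p.2])) PySem.Dict.empty := by
      simp only [List.foldl_map]
    rw [hmapped, PySem.Dict.getD_foldl_modify_append, List.filter_map, List.map_map]
    simp [pvBucket, Function.comp_def]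
  rw [PySem.Dict.values_eq_map_keys _ hnodup [], hkeys]
  exact List.map_congr_left (fun k _ => hgetD k)

theorem pvBucket_eq_sem (board : List (List String)) {z : Int × Int}
    (hz : z ∈ pvScanNS board) :
    pvBucket board (pvKey board z) = pvSem board z := by
  obtain ⟨hzg, hzNS⟩ := (pv_mem_scanNS board z).mp hz
  rw [pvBucket, pvScanNS, List.filter_filter, pvSem, pvCanon]
  refine List.filter_congr ?_
  intro p hp
  have hpg : pvInGrid board p = true := pv_mem_gridList.mp hp
  rw [Bool.eq_iff_iff, Bool.and_eq_true_iff, List.contains_iff_mem]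
  constructor
  · rintro ⟨h1, h2⟩
    have hpNS : pvNS board p := (pvLabelMap_contains board p).mp h2
    rw [beq_iff_eq] at h1
    exact (pvLabel_eq_iff_mem_group board hzNS hpNS).mp (by simpa [pvKey] using h1.symm)
  · intro hmem
    have hpNS : pvNS board p := pvGroup_cells_NS board hzNS hmem
    refine ⟨?_, (pvLabelMap_contains board p).mpr hpNS⟩
    rw [beq_iff_eq]
    simpa [pvKey] using ((pvLabel_eq_iff_mem_group board hzNS hpNS).mpr hmem).symm

theorem pvScanNS_eq_filter (board : List (List String)) :
    pvScanNS board = (pvGridList board).filter (fun z => !(pvCell board z.2 z.1 == " ")) := by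
  rw [pvScanNS]
  refine List.filter_congr ?_
  intro z hz
  have hzg : pvInGrid board z = true := pv_mem_gridList.mp hz
  rw [Bool.eq_iff_iff]
  rw [pvLabelMap_contains board z]
  constructor
  · intro h
    simpa using h.2
  · intro h
    exact ⟨hzg, by simpa using h⟩

theorem pvFind_prefix_found (board : List (List String)) (W H : Int)
    (s : PySem.Set (Int × Int)) (k : Int × Int) (xs : List (Int × Int))
    (hs : ∀ k' ∈ s, pvOptB board (pvBucket board k') W H = false)
    (hk : pvOptB board (pvBucket board k) W H = true) :
    pvFind board W H ((PySem.Set.update (s ++ [k]) xs).map (pvBucket board)) =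
      some (PySem.Set.ofList (pvBucket board k)) := by
  obtain ⟨ext, hext⟩ := pvSet_update_append xs (s ++ [k])
  rw [hext, List.append_assoc, List.map_append, pvFind_append]
  rw [pvFind_none board W H _ (by
    intro cells hc
    obtain ⟨k', hk', rfl⟩ := List.mem_map.mp hc
    exact hs k' hk')]
  rw [List.cons_append, List.map_cons, pvFind, if_pos hk]

theorem pvFind_buckets (board : List (List String)) (W H : Int) :
    ∀ (l : List (Int × Int)) (s : PySem.Set (Int × Int)),
    (∀ z ∈ l, z ∈ pvScanNS board) →
    (∀ k ∈ s, pvOptB board (pvBucket board k) W H = false) →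
    pvFind board W H ((PySem.Set.update s (l.map (pvKey board))).map (pvBucket board)) =
      pvScanSem board W H l := by
  intro l
  induction l with
  | nil =>
    intro s _ hs
    rw [List.map_nil]
    rw [show PySem.Set.update s [] = s from rfl]
    rw [pvScanSem]
    exact pvFind_none board W H _ (by
      intro cells hc
      obtain ⟨k', hk', rfl⟩ := List.mem_map.mp hc
      exact hs k' hk')
  | cons z l' ih =>
    intro s hl hs
    have hzscan : z ∈ pvScanNS board := hl z (List.mem_cons_self ..)
    have hzNS : pvNS board z := ((pv_mem_scanNS board z).mp hzscan).2
    have hno : (pvCell board z.2 z.1 == " ") = false := by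
      simpa using hzNS.2
    have hbz : pvBucket board (pvKey board z) = pvSem board z := pvBucket_eq_sem board hzscan
    rw [List.map_cons]
    rw [show PySem.Set.update s (pvKey board z :: l'.map (pvKey board)) =
      PySem.Set.update (PySem.Set.add s (pvKey board z)) (l'.map (pvKey board)) from rfl]
    rw [pvScanSem]
    simp only [hno, Bool.not_false, Bool.true_and]
    by_cases hmem : (pvKey board z) ∈ s
    · have hverd : pvOptB board (pvSem board z) W H = false := by
        rw [← hbz]
        exact hs _ hmem
      rw [hverd]
      simp only [Bool.false_eq_true, if_false]
      rw [PySem.Set.add_of_mem hmem]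
      exact ih s (fun a ha => hl a (List.mem_cons_of_mem _ ha)) hs
    · rw [PySem.Set.add_of_not_mem hmem]
      by_cases hverd : pvOptB board (pvSem board z) W H = true
      · rw [hverd, if_pos rfl]
        rw [pvFind_prefix_found board W H s (pvKey board z) _ hs (by rw [hbz]; exact hverd)]
        rw [hbz]
        rw [PySem.Set.ofList_eq_self_of_nodup _ (by
          rw [pvSem, pvCanon]
          exact List.Nodup.filter _ (pvGridList_nodup board))]
      · rw [Bool.not_eq_true] at hverd
        rw [hverd]
        simp only [Bool.false_eq_true, if_false]
        refine ih (s ++ [pvKey board z]) (fun a ha => hl a (List.mem_cons_of_mem _ ha)) ?_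
        intro k hk
        rcases List.mem_append.mp hk with h | h
        · exact hs k h
        · rw [List.mem_singleton.mp h, hbz]
          exact hverd


-- ---- A's per-cell decision is B's per-component check ----

theorem pv_min_eq (l1 l2 : List Int) (hm : ∀ v, v ∈ l1 ↔ v ∈ l2) (h1 : l1 ≠ []) :
    PySem.List.min? l1 (fun v => v) = PySem.List.min? l2 (fun v => v) := by
  have h2 : l2 ≠ [] := by
    intro h
    obtain ⟨a, ha⟩ := List.exists_mem_of_ne_nil l1 h1
    rw [h] at hm
    exact (List.not_mem_nil).elim ((hm a).mp ha)
  cases e1 : PySem.List.min? l1 (fun v => v) with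
  | none => exact absurd ((PySem.List.min?_eq_none_iff ..).mp e1) h1
  | some m1 =>
    cases e2 : PySem.List.min? l2 (fun v => v) with
    | none => exact absurd ((PySem.List.min?_eq_none_iff ..).mp e2) h2
    | some m2 =>
      have hle1 := PySem.List.min?_isMin e1 m2 ((hm m2).mpr (PySem.List.min?_mem e2))
      have hle2 := PySem.List.min?_isMin e2 m1 ((hm m1).mp (PySem.List.min?_mem e1))
      exact congrArg some (le_antisymm hle1 hle2)

theorem pv_max_eq (l1 l2 : List Int) (hm : ∀ v, v ∈ l1 ↔ v ∈ l2) (h1 : l1 ≠ []) :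
    PySem.List.max? l1 (fun v => v) = PySem.List.max? l2 (fun v => v) := by
  have h2 : l2 ≠ [] := by
    intro h
    obtain ⟨a, ha⟩ := List.exists_mem_of_ne_nil l1 h1
    rw [h] at hm
    exact (List.not_mem_nil).elim ((hm a).mp ha)
  cases e1 : PySem.List.max? l1 (fun v => v) with
  | none => exact absurd ((PySem.List.max?_eq_none_iff ..).mp e1) h1
  | some m1 =>
    cases e2 : PySem.List.max? l2 (fun v => v) with
    | none => exact absurd ((PySem.List.max?_eq_none_iff ..).mp e2) h2
    | some m2 =>
      have hle1 := PySem.List.max?_isMax e1 m2 ((hm m2).mpr (PySem.List.max?_mem e2))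
      have hle2 := PySem.List.max?_isMax e2 m1 ((hm m1).mp (PySem.List.max?_mem e1))
      exact congrArg some (le_antisymm hle2 hle1)

theorem pv_bool_band (a b : Bool) : (!(!a && b)) = (a || !b) := by
  cases a <;> cases b <;> rfl

theorem pvDecision_eq (board : List (List String)) (W H : Int) {z : Int × Int}
    (hz : pvNS board z) :
    (pvAboveOkA board (pvGetGroup board z.1 z.2) &&
      pvBandOkA board (pvCell board z.2 z.1) (pvGetGroup board z.1 z.2) W H
        ((PySem.List.min? ((pvGetGroup board z.1 z.2).map Prod.fst) (fun v => v)).getD 0)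
        ((PySem.List.max? ((pvGetGroup board z.1 z.2).map Prod.fst) (fun v => v)).getD 0)) =
      pvOptB board (pvSem board z) W H := by
  have hsub : ∀ p ∈ pvGetGroup board z.1 z.2,
      pvInGrid board p = true ∧ pvCell board p.2 p.1 = pvCell board z.2 z.1 := by
    intro p hp
    exact pvGetGroup_cells board (x := z.1) (y := z.2) hz.1 hp
  have hmem : ∀ p, p ∈ pvSem board z ↔ p ∈ pvGetGroup board z.1 z.2 := by
    intro p
    rw [pvSem, pvCanon, List.mem_filter, List.contains_iff_mem]
    constructor
    · rintro ⟨_, h2⟩; exact h2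
    · intro h; exact ⟨pv_mem_gridList.mpr (hsub p h).1, h⟩
  have hzc : z ∈ pvSem board z := (hmem z).mpr (by
    have := pvGetGroup_self_mem board z.1 z.2
    simpa using this)
  have hne : pvSem board z ≠ [] := List.ne_nil_of_mem hzc
  obtain ⟨c0, crest, hco⟩ := List.exists_cons_of_ne_nil hne
  have hc0 : PySem.List.pyGetD (pvSem board z) 0 ((0 : Int), (0 : Int)) = c0 := by
    rw [hco]
    simp [pysem]
  have hc0t : pvCell board c0.2 c0.1 = pvCell board z.2 z.1 :=
    (hsub c0 ((hmem c0).mp (hco ▸ List.mem_cons_self ..))).2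
  have hmapmem : ∀ v, v ∈ (pvSem board z).map Prod.fst ↔
      v ∈ (pvGetGroup board z.1 z.2).map Prod.fst := by
    intro v
    simp only [List.mem_map]
    constructor
    · rintro ⟨p, hp, rfl⟩; exact ⟨p, (hmem p).mp hp, rfl⟩
    · rintro ⟨p, hp, rfl⟩; exact ⟨p, (hmem p).mpr hp, rfl⟩
  have hmin := pv_min_eq ((pvSem board z).map Prod.fst)
    ((pvGetGroup board z.1 z.2).map Prod.fst) hmapmem (by simpa using hne)
  have hmax := pv_max_eq ((pvSem board z).map Prod.fst)
    ((pvGetGroup board z.1 z.2).map Prod.fst) hmapmem (by simpa using hne)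
  have hcont : ∀ q, PySem.Set.contains (PySem.Set.ofList (pvSem board z)) q =
      (pvGetGroup board z.1 z.2).contains q := by
    intro q
    rw [Bool.eq_iff_iff, PySem.Set.contains_iff, PySem.Set.mem_ofList]
    exact (hmem q).trans List.contains_iff_mem.symm
  -- the element-wise 'above' test agrees on group members
  have hpoint : ∀ p ∈ pvGetGroup board z.1 z.2,
      ((p.2 == (0 : Int)) ||
        ((pvCell board (p.2 - 1) p.1 == pvCell board p.2 p.1) ||
          (pvCell board (p.2 - 1) p.1 == " "))) =
      (!(decide ((0 : Int) < p.2) &&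
        !(pvCell board (p.2 - 1) p.1 == pvCell board z.2 z.1) &&
        !(pvCell board (p.2 - 1) p.1 == " "))) := by
    intro p hp
    obtain ⟨hpg, hpt⟩ := hsub p hp
    have h0 : (0 : Int) ≤ p.2 := by
      simp only [pvInGrid, Bool.and_eq_true, decide_eq_true_eq] at hpg
      exact hpg.1.2
    rw [hpt]
    by_cases hz0 : p.2 = 0
    · simp [hz0]
    · have hlt : (0 : Int) < p.2 := lt_of_le_of_ne h0 (Ne.symm hz0)
      have hne0 : (p.2 == (0 : Int)) = false := by simpa using hz0
      simp only [hne0, hlt, decide_true, Bool.true_and, Bool.false_or]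
      cases (pvCell board (p.2 - 1) p.1 == pvCell board z.2 z.1) <;>
        cases (pvCell board (p.2 - 1) p.1 == " ") <;> rfl
  have habove : pvAboveOkA board (pvGetGroup board z.1 z.2) =
      !((pvSem board z).any (fun p => decide ((0 : Int) < p.2) &&
        !(pvCell board (p.2 - 1) p.1 == pvCell board z.2 z.1) &&
        !(pvCell board (p.2 - 1) p.1 == " "))) := by
    rw [pvAboveOkA, Bool.eq_iff_iff, List.all_eq_true, Bool.not_eq_true', Bool.eq_false_iff,
      Ne, List.any_eq_true]
    constructor
    · intro h
      rintro ⟨p, hp, hbad⟩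
      have := h p ((hmem p).mp hp)
      rw [hpoint p ((hmem p).mp hp)] at this
      rw [hbad] at this
      cases this
    · intro h p hp
      rw [hpoint p hp]
      rw [Bool.not_eq_true']
      rw [Bool.eq_false_iff, Ne]
      intro hbad
      exact h ⟨p, (hmem p).mpr hp, hbad⟩
  rw [pvOptB]
  simp only [hc0, hc0t, hmin, hmax, habove]
  by_cases hany : ((pvSem board z).any (fun p => decide ((0 : Int) < p.2) &&
      !(pvCell board (p.2 - 1) p.1 == pvCell board z.2 z.1) &&
      !(pvCell board (p.2 - 1) p.1 == " "))) = true
  · rw [hany]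
    simp only [Bool.not_true, Bool.false_and, if_true]
  · rw [Bool.not_eq_true] at hany
    rw [hany]
    simp only [Bool.not_false, Bool.true_and, Bool.false_eq_true, if_false]
    rw [pvBandOkA]
    refine List.all_congr rfl (fun y => ?_)
    refine List.all_congr rfl (fun x => ?_)
    rw [hcont (x, y), pv_bool_band]
    rfl


-- ---- flattening A's nested scan ----

theorem pvColsA_cons (board : List (List String)) (W H y bx : Int) (gt : String)
    (rest : List (Int × String)) :
    pvColsA board W H y ((bx, gt) :: rest) =
      if gt == " " then pvColsA board W H y rest
      else if (pvAboveOkA board (pvGetGroup board bx y) &&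
          pvBandOkA board gt (pvGetGroup board bx y) W H
            ((PySem.List.min? ((pvGetGroup board bx y).map Prod.fst) (fun v => v)).getD 0)
            ((PySem.List.max? ((pvGetGroup board bx y).map Prod.fst) (fun v => v)).getD 0))
        then some (pvCanon board (pvGetGroup board bx y))
      else pvColsA board W H y rest := by
  rw [pvColsA]
  by_cases hsp : (gt == " ") = true
  · simp [hsp]
  · rw [Bool.not_eq_true] at hsp
    simp only [hsp, Bool.false_eq_true, if_false]
    by_cases ha : pvAboveOkA board (pvGetGroup board bx y) = true
    · by_cases hb : pvBandOkA board gt (pvGetGroup board bx y) W H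
          ((PySem.List.min? ((pvGetGroup board bx y).map Prod.fst) (fun v => v)).getD 0)
          ((PySem.List.max? ((pvGetGroup board bx y).map Prod.fst) (fun v => v)).getD 0) = true
      · simp [ha, hb]
      · rw [Bool.not_eq_true] at hb
        simp [ha, hb]
    · rw [Bool.not_eq_true] at ha
      simp [ha]

theorem pvScanSem_append (board : List (List String)) (W H : Int)
    (u v : List (Int × Int)) :
    pvScanSem board W H (u ++ v) =
      match pvScanSem board W H u with
      | some r => some r
      | none => pvScanSem board W H v := by
  induction u with
  | nil => simp [pvScanSem]
  | cons z u' ih =>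
    rw [List.cons_append, pvScanSem, pvScanSem]
    by_cases h : (!(pvCell board z.2 z.1 == " ") && pvOptB board (pvSem board z) W H) = true
    · simp [h]
    · rw [Bool.not_eq_true] at h
      simp [h, ih]

theorem pvColsA_eq_scan (board : List (List String)) (W H y : Int)
    (hy : 0 ≤ y ∧ y < (board.length : Int)) :
    ∀ (xs : List Int), (∀ j ∈ xs, 0 ≤ j ∧ j < (pvW board : Int)) →
    pvColsA board W H y (xs.map (fun j => (j, pvCell board y j))) =
      pvScanSem board W H (xs.map (fun x => (x, y))) := by
  intro xs
  induction xs with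
  | nil => intro _; rfl
  | cons j xs' ih =>
    intro hxs
    have hj := hxs j (List.mem_cons_self ..)
    have hgrid : pvInGrid board (j, y) = true := by
      simp only [pvInGrid, Bool.and_eq_true, decide_eq_true_eq]
      exact ⟨⟨⟨hj.1, hj.2⟩, hy.1⟩, hy.2⟩
    rw [List.map_cons, List.map_cons, pvColsA_cons, pvScanSem]
    by_cases hsp : (pvCell board y j == " ") = true
    · rw [if_pos hsp]
      have : (pvCell board (j, y).2 (j, y).1 == " ") = true := hsp
      rw [this]
      simp only [Bool.not_true, Bool.false_and, Bool.false_eq_true, if_false]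
      exact ih (fun a ha => hxs a (List.mem_cons_of_mem _ ha))
    · rw [Bool.not_eq_true] at hsp
      rw [if_neg (by rw [hsp]; simp)]
      have hNS : pvNS board (j, y) := ⟨hgrid, by simpa using hsp⟩
      have hdec := pvDecision_eq board W H hNS
      have : (pvCell board (j, y).2 (j, y).1 == " ") = false := hsp
      rw [this]
      simp only [Bool.not_false, Bool.true_and]
      rw [show pvCell board y j = pvCell board (j, y).2 (j, y).1 from rfl, hdec]
      by_cases hv : pvOptB board (pvSem board (j, y)) W H = true
      · rw [hv, if_pos rfl, if_pos rfl]
        rfl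
      · rw [Bool.not_eq_true] at hv
        rw [hv]
        simp only [Bool.false_eq_true, if_false]
        exact ih (fun a ha => hxs a (List.mem_cons_of_mem _ ha))

theorem pvRowsA_eq_scan (board : List (List String)) (W H : Int)
    (hrect : ∀ row ∈ board, row.length = pvW board) :
    ∀ (ys : List Int), (∀ i ∈ ys, 0 ≤ i ∧ i < (board.length : Int)) →
    pvRowsA board W H (ys.map (fun i => (i, PySem.List.pyGetD board i []))) =
      pvScanSem board W H (ys.flatMap (fun y =>
        (PySem.List.pyRange 0 (pvW board : Int) 1).map (fun x => (x, y)))) := by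
  intro ys
  induction ys with
  | nil => intro _; rfl
  | cons i ys' ih =>
    intro hys
    have hi := hys i (List.mem_cons_self ..)
    have hrow : PySem.List.pyGetD board i [] ∈ board :=
      PySem.List.pyGetD_mem board [] ⟨by omega, hi.2⟩
    have hlenW : PySem.List.len (PySem.List.pyGetD board i []) = (pvW board : Int) := by
      have := hrect _ hrow
      simp [PySem.List.len, this]
    rw [List.map_cons, List.flatMap_cons, pvScanSem_append]
    simp only [pvRowsA]
    rw [PySem.List.enumerate_eq_map_pyRange (PySem.List.pyGetD board i []) "", hlenW]
    have hcols := pvColsA_eq_scan board W H i hi (PySem.List.pyRange 0 (pvW board : Int) 1)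
      (fun j hj => (PySem.List.mem_pyRange_one).mp hj)
    have hfn : (fun j => (j, PySem.List.pyGetD (PySem.List.pyGetD board i []) j "")) =
        (fun j => (j, pvCell board i j)) := rfl
    rw [hfn, hcols]
    rcases hres : pvScanSem board W H
        ((PySem.List.pyRange 0 (pvW board : Int) 1).map (fun x => (x, i))) with _ | g
    · exact ih (fun a ha => hys a (List.mem_cons_of_mem _ ha))
    · rfl

-- ---- the two programs, flattened ----

theorem pvA_eq_scan (board : List (List String))
    (hrect : ∀ row ∈ board, row.length = pvW board) :
    get_optimal_group board =
      pvScanSem board (pvW board : Int) (board.length : Int) (pvGridList board) := by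
  rw [get_optimal_group]
  rw [PySem.List.enumerate_eq_map_pyRange board []]
  rw [show PySem.List.len board = (board.length : Int) from rfl]
  exact pvRowsA_eq_scan board (pvW board : Int) (board.length : Int) hrect
    (PySem.List.pyRange 0 (board.length : Int) 1)
    (fun i hi => (PySem.List.mem_pyRange_one).mp hi)

theorem pvB_eq_scan (board : List (List String)) :
    get_optimal_group_alt board =
      pvScanSem board (pvW board : Int) (board.length : Int) (pvGridList board) := by
  rw [get_optimal_group_alt]
  rw [pvComps_values]
  rw [show (PySem.Set.ofList ((pvScanNS board).map (pvKey board))) =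
    PySem.Set.update PySem.Set.empty ((pvScanNS board).map (pvKey board)) from rfl]
  rw [pvFind_buckets board (pvW board : Int) (board.length : Int) (pvScanNS board)
    PySem.Set.empty (fun z hz => hz) (fun k hk => absurd hk (List.not_mem_nil))]
  rw [pvScanSem_filter board (pvW board : Int) (board.length : Int) (pvGridList board),
    ← pvScanNS_eq_filter]

-- ===== VERDICT (by name: the statement is the Claim_ definition above) =====
theorem get_optimal_group_spec : Claim_equal_get_optimal_group := by
  intro board _ hpre
  unfold Spec_get_optimal_group
  rw [pvA_eq_scan board hpre.2, pvB_eq_scan board]
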